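-- pv_equiv track=rewrite | github.com/ParkHyeongKyu/baekjoon | bruteforce/pg-빛의경로사이클.py | solution
-- ===== SOURCE A (Python) =====
-- from collections import deque
--
-- dx = [1, 0, -1, 0]
--
-- dy = [0, 1, 0, -1]
--
-- def solution(grid):
--     answer = []
--
--     check = [[[False for _ in range(4)] for _ in range(len(grid[0]))] for _ in range(len(grid))]
--
--     for x in range(len(grid)):
--         for y in range(len(grid[0])):
--             for dir in range(4):
--                 if not check[x][y][dir]:
--                     cnt = 0
--                     q = deque()
--
--                     q.append((x, y, dir))
--                     check[x][y][dir] = True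
--                     while q:
--                         nx, ny, ndir = q.popleft()
--
--                         if nx == x and ny == y and ndir == dir and cnt != 0:
--                             break
--                         kx = (nx + dx[ndir]) % len(grid)
--                         ky = (ny + dy[ndir]) % len(grid[0])
--
--                         if grid[kx][ky] == 'S':
--                             kdir = ndir
--                         elif grid[kx][ky] == 'L':
--                             kdir = (ndir + 1) % 4
--                         elif grid[kx][ky] == 'R':
--                             kdir = (ndir - 1) % 4
--
--                         q.append((kx, ky, kdir))
--                         check[kx][ky][kdir] = True
--                         cnt += 1
--                     answer.append(cnt)
--     answer.sort()
--     return answer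
-- ===== SOURCE B (Python) =====
-- dx = [1, 0, -1, 0]
--
-- dy = [0, 1, 0, -1]
--
-- def solution(grid):
--     R = len(grid)
--     C = len(grid[0])
--     n = 4 * R * C
--
--     # pass 1: successor table over flattened states s = (x*C + y)*4 + d
--     nxt = []
--     for s in range(n):
--         d = s % 4
--         y = (s // 4) % C
--         x = s // (4 * C)
--         kx = (x + dx[d]) % R
--         ky = (y + dy[d]) % C
--         c = grid[kx][ky]
--         if c == 'S':
--             kd = d
--         elif c == 'L':
--             kd = (d + 1) % 4
--         elif c == 'R':
--             kd = (d - 1) % 4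
--         nxt.append((kx * C + ky) * 4 + kd)
--
--     # pass 2: no visited structure at all — the cycle length of EVERY state
--     counts = {}
--     for s in range(n):
--         t = nxt[s]
--         L = 1
--         while t != s:
--             t = nxt[t]
--             L += 1
--         counts[L] = counts.get(L, 0) + 1
--
--     # a cycle of length L contributes L states of cycle length L,
--     # so it appears counts[L] // L times in the answer
--     ans = []
--     for L, c in counts.items():
--         ans += [L] * (c // L)
--     return sorted(ans)
-- ===== Notes on version B (the rewrite author's own statement) =====
-- stated objective: alternative
-- what changed: Replaces A's visited-marking cycle walk over a 3-D check matrix by a visited-free counting scheme: flatten states to integers, precompute the successor table, compute the cycle length of EVERY state independently, and recover each cycle's multiplicity arithmetically as (number of states of that cycle length) divided by the length.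
-- outside the precondition, e.g. on solution(['SL', 'LX']): A returns [8, 8], B does not finish within the time limit; on solution([]): A returns [], B raises IndexError
import Mathlib
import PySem

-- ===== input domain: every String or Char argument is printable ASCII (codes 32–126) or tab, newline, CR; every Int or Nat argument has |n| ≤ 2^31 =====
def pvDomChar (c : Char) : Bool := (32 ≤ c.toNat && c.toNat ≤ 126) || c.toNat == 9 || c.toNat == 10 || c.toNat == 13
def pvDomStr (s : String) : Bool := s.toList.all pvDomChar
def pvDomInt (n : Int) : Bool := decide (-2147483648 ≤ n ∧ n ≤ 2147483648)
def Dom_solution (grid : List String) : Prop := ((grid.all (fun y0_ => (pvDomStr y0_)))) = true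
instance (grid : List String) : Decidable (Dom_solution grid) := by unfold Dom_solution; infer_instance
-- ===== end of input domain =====

-- B removes A's visited bookkeeping entirely: it computes the cycle length of EVERY flattened
-- state independently and recovers each cycle's multiplicity by dividing the per-length state
-- count by the length (objective: alternative; not faster).

-- ===== PORT A =====
-- module-level constants dx, dy (shared by both Python files)
def dxPy : List Int := [1, 0, -1, 0]
def dyPy : List Int := [0, 1, 0, -1]

-- grid[i][j]; the defaults are totality guards only: under Pre_ every access is in range
def gridAt (grid : List String) (i j : Int) : Char :=
  (PySem.Str.pyGet? ((PySem.List.pyGet? grid i).getD "") j).getD '?'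

-- check[x][y][d]
def checkAt (check : List (List (List Bool))) (x y d : Int) : Bool :=
  PySem.List.pyGetD (PySem.List.pyGetD (PySem.List.pyGetD check x []) y []) d false

-- check[x][y][d] = True
def checkSet (check : List (List (List Bool))) (x y d : Int) : List (List (List Bool)) :=
  PySem.List.pySetD check x
    (PySem.List.pySetD (PySem.List.pyGetD check x []) y
      (PySem.List.pySetD (PySem.List.pyGetD (PySem.List.pyGetD check x []) y []) d true))

-- the 'while q:' loop; fuel only makes the recursion total (Python has no bound); the
-- final else-branch of the kdir chain is where Python raises NameError (outside Pre_)
def aWalk (grid : List String) (R C x y dir : Int) :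
    Nat → List (Int × Int × Int) → Int → List (List (List Bool)) → Int × List (List (List Bool))
  | 0, _, cnt, check => (cnt, check)
  | _ + 1, [], cnt, check => (cnt, check)
  | fuel + 1, (nx, ny, ndir) :: rest, cnt, check =>
    if nx = x ∧ ny = y ∧ ndir = dir ∧ cnt ≠ 0 then (cnt, check)
    else
      let kx := PySem.Int.mod (nx + PySem.List.pyGetD dxPy ndir 0) R
      let ky := PySem.Int.mod (ny + PySem.List.pyGetD dyPy ndir 0) C
      let g := gridAt grid kx ky
      let kdir := if g = 'S' then ndir
        else if g = 'L' then PySem.Int.mod (ndir + 1) 4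
        else if g = 'R' then PySem.Int.mod (ndir - 1) 4
        else ndir
      aWalk grid R C x y dir fuel (rest ++ [(kx, ky, kdir)]) (cnt + 1) (checkSet check kx ky kdir)

def solution (grid : List String) : List Int :=
  let R : Int := PySem.List.len grid
  let C : Int := PySem.Str.len ((PySem.List.pyGet? grid 0).getD "")   -- len(grid[0]); grid ≠ [] under Pre_
  let check0 : List (List (List Bool)) :=
    List.replicate R.toNat (List.replicate C.toNat (List.replicate 4 false))
  let fuel : Nat := 4 * R.toNat * C.toNat + 2
  let st := (PySem.List.pyRange 0 R 1).foldl (fun st x =>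
    (PySem.List.pyRange 0 C 1).foldl (fun st y =>
      (PySem.List.pyRange 0 4 1).foldl (fun st dir =>
        if checkAt st.2 x y dir then st
        else
          let r := aWalk grid R C x y dir fuel [(x, y, dir)] 0 (checkSet st.2 x y dir)
          (st.1 ++ [r.1], r.2)) st) st) (([] : List Int), check0)
  PySem.List.sorted st.1 (fun v => v) false

-- ===== PORT B =====
-- body of B's first pass: successor of the flattened state s; the final else-branch of the
-- kd chain is where Python raises UnboundLocalError (outside Pre_)
def bSucc (grid : List String) (R C s : Int) : Int :=
  let d := PySem.Int.mod s 4
  let y := PySem.Int.mod (PySem.Int.floordiv s 4) C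
  let x := PySem.Int.floordiv s (4 * C)
  let kx := PySem.Int.mod (x + PySem.List.pyGetD dxPy d 0) R
  let ky := PySem.Int.mod (y + PySem.List.pyGetD dyPy d 0) C
  let g := gridAt grid kx ky
  let kd := if g = 'S' then d
    else if g = 'L' then PySem.Int.mod (d + 1) 4
    else if g = 'R' then PySem.Int.mod (d - 1) 4
    else d
  (kx * C + ky) * 4 + kd

-- the 'while t != s:' loop of B's second pass; fuel only makes the recursion total
def clenLoop (nxt : List Int) (s : Int) : Nat → Int → Int → Int
  | 0, _, L => L
  | fuel + 1, t, L => if t = s then L else clenLoop nxt s fuel (PySem.List.pyGetD nxt t 0) (L + 1)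

def solution_alt (grid : List String) : List Int :=
  let R : Int := PySem.List.len grid
  let C : Int := PySem.Str.len ((PySem.List.pyGet? grid 0).getD "")   -- len(grid[0]); grid ≠ [] under Pre_
  let n : Int := 4 * R * C
  let nxt : List Int := (PySem.List.pyRange 0 n 1).foldl (fun acc s => acc ++ [bSucc grid R C s]) []
  let fuel : Nat := n.toNat + 1
  let counts : PySem.Dict Int Int := (PySem.List.pyRange 0 n 1).foldl
    (fun d s => d.modify (clenLoop nxt s fuel (PySem.List.pyGetD nxt s 0) 1) 0 (· + 1))
    PySem.Dict.empty
  -- 'ans += [L] * (c // L)'; .toNat because Python's list repetition treats a negative count as 0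
  let ans : List Int := counts.items.foldl
    (fun acc p => acc ++ List.replicate (PySem.Int.floordiv p.2 p.1).toNat p.1) []
  PySem.List.sorted ans (fun v => v) false

-- ===== PRECONDITION & SPEC =====
-- Pre_ excludes the empty grid (A returns [] only because its comprehension never reaches
-- grid[0], B raises IndexError), grids with a row shorter than row 0 (A raises IndexError),
-- and grids with a character other than 'S'/'L'/'R' among the first len(grid[0]) characters
-- of some row, on which A raises UnboundLocalError, loops forever, or returns a value
-- depending on the leftover kdir of an earlier step, while B raises or loops forever there.
def Pre_solution (grid : List String) : Prop :=
  grid ≠ [] ∧ (grid.all (fun row =>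
    decide ((grid.headD "").toList.length ≤ row.toList.length) &&
    ((row.toList.take (grid.headD "").toList.length).all
      (fun c => c == 'S' || c == 'L' || c == 'R')))) = true
instance (grid : List String) : Decidable (Pre_solution grid) := by unfold Pre_solution; infer_instance

def pvWitness_solution : List String := ["SL", "RS"]

def Spec_solution (grid : List String) (out : List Int) : Prop := out = solution_alt grid
instance (grid : List String) (out : List Int) : Decidable (Spec_solution grid out) := by unfold Spec_solution; infer_instance

-- ===== CLAIM (what is proved, stated in full; the proofs are below) =====
def Claim_equal_solution : Prop := ∀ (grid : List String), Dom_solution grid → Pre_solution grid → Spec_solution grid (solution grid)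

-- ===== LEMMAS AND PROOFS =====

-- ---------- Part 1: A equals the flat visited-walk cycle decomposition refB ----------
-- refB is a proof-layer intermediate: the same successor table as B's first pass, consumed
-- by A's visited-walk decomposition; A = refB is a pure bisimulation (no precondition).

-- the reference 'while t != s:' loop that also marks visited states
def refWalk (nxt : List Int) (s : Int) : Nat → Int → Int → List Bool → Int × List Bool
  | 0, _, cnt, visited => (cnt, visited)
  | fuel + 1, t, cnt, visited =>
    if t = s then (cnt, visited)
    else
      let t' := PySem.List.pyGetD nxt t 0
      refWalk nxt s fuel t' (cnt + 1) (PySem.List.pySetD visited t' true)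

def refB (grid : List String) : List Int :=
  let R : Int := PySem.List.len grid
  let C : Int := PySem.Str.len ((PySem.List.pyGet? grid 0).getD "")
  let n : Int := 4 * R * C
  let nxt : List Int := (PySem.List.pyRange 0 n 1).map (bSucc grid R C)
  let fuel : Nat := 4 * R.toNat * C.toNat + 1
  let st := (PySem.List.pyRange 0 n 1).foldl (fun st s =>
    if PySem.List.pyGetD st.2 s false then st
    else
      let t := PySem.List.pyGetD nxt s 0
      let visited1 := PySem.List.pySetD (PySem.List.pySetD st.2 s true) t true
      let r := refWalk nxt s fuel t 1 visited1
      (st.1 ++ [r.1], r.2)) (([] : List Int), List.replicate n.toNat false)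
  PySem.List.sorted st.1 (fun v => v) false

-- state bounds and the flattening bijection
def InSt (R C : Nat) (x y d : Int) : Prop :=
  0 ≤ x ∧ x < R ∧ 0 ≤ y ∧ y < C ∧ 0 ≤ d ∧ d < 4

def enc (C : Nat) (x y d : Int) : Int := (x * C + y) * 4 + d

def Shape (R C : Nat) (check : List (List (List Bool))) : Prop :=
  check.length = R ∧ ∀ row ∈ check, row.length = C ∧ ∀ cell ∈ row, cell.length = 4

def StoreInv (R C : Nat) (check : List (List (List Bool))) (visited : List Bool) : Prop :=
  Shape R C check ∧ visited.length = 4 * R * C ∧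
    ∀ x y d, InSt R C x y d →
      checkAt check x y d = PySem.List.pyGetD visited (enc C x y d) false

lemma enc_range {R C : Nat} {x y d : Int} (h : InSt R C x y d) :
    0 ≤ enc C x y d ∧ enc C x y d < 4 * R * C := by
  obtain ⟨h1, h2, h3, h4, h5, h6⟩ := h
  unfold enc
  constructor
  · nlinarith
  · nlinarith

lemma dec_d {C : Nat} {x y d : Int} (hd : 0 ≤ d) (hd4 : d < 4) :
    PySem.Int.mod (enc C x y d) 4 = d := by
  rw [PySem.Int.mod_eq_emod_of_pos (by norm_num)]
  unfold enc
  rw [show (x * C + y) * 4 + d = d + 4 * (x * C + y) by ring]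
  rw [Int.add_mul_emod_self_left, Int.emod_eq_of_lt hd hd4]

lemma dec_y {C : Nat} {x y d : Int} (hy : 0 ≤ y) (hyC : y < C) (hd : 0 ≤ d) (hd4 : d < 4) :
    PySem.Int.mod (PySem.Int.floordiv (enc C x y d) 4) C = y := by
  have hC : (0:Int) < C := lt_of_le_of_lt hy hyC
  rw [PySem.Int.floordiv_eq_ediv_of_pos (by norm_num), PySem.Int.mod_eq_emod_of_pos hC]
  unfold enc
  rw [show (x * C + y) * 4 + d = d + 4 * (x * C + y) by ring]
  rw [Int.add_mul_ediv_left _ _ (by norm_num), Int.ediv_eq_zero_of_lt hd hd4]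
  rw [show (0 : Int) + (x * C + y) = y + C * x by ring]
  rw [Int.add_mul_emod_self_left, Int.emod_eq_of_lt hy hyC]

lemma dec_x {C : Nat} {x y d : Int} (hy : 0 ≤ y) (hyC : y < C) (hd : 0 ≤ d) (hd4 : d < 4) :
    PySem.Int.floordiv (enc C x y d) (4 * C) = x := by
  have hC : (0:Int) < C := lt_of_le_of_lt hy hyC
  rw [PySem.Int.floordiv_eq_ediv_of_pos (by positivity)]
  unfold enc
  rw [show (x * C + y) * 4 + d = (y * 4 + d) + (4 * C) * x by ring]
  rw [Int.add_mul_ediv_left _ _ (by positivity), Int.ediv_eq_zero_of_lt (by omega) (by omega), zero_add]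

lemma enc_inj {R C : Nat} {x y d x' y' d' : Int}
    (h : InSt R C x y d) (h' : InSt R C x' y' d')
    (he : enc C x y d = enc C x' y' d') : x = x' ∧ y = y' ∧ d = d' := by
  obtain ⟨h1, h2, h3, h4, h5, h6⟩ := h
  obtain ⟨h1', h2', h3', h4', h5', h6'⟩ := h'
  have ed : d = d' := by
    have := dec_d (C := C) (x := x) (y := y) h5 h6
    have := dec_d (C := C) (x := x') (y := y') h5' h6'
    rw [he] at *; omega
  have ey : y = y' := by
    have := dec_y (C := C) (x := x) h3 h4 h5 h6
    have := dec_y (C := C) (x := x') h3' h4' h5' h6'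
    rw [he] at *; omega
  have ex : x = x' := by
    have := dec_x (C := C) (x := x) h3 h4 h5 h6
    have := dec_x (C := C) (x := x') h3' h4' h5' h6'
    rw [he] at *; omega
  exact ⟨ex, ey, ed⟩

-- bSucc on an encoded in-range state computes exactly A's inline step
lemma bSucc_enc {grid : List String} {R C : Nat} {x y d : Int} (h : InSt R C x y d) :
    bSucc grid R C (enc C x y d) =
      enc C (PySem.Int.mod (x + PySem.List.pyGetD dxPy d 0) R)
            (PySem.Int.mod (y + PySem.List.pyGetD dyPy d 0) C)
            (if gridAt grid (PySem.Int.mod (x + PySem.List.pyGetD dxPy d 0) R)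
                           (PySem.Int.mod (y + PySem.List.pyGetD dyPy d 0) C) = 'S' then d
             else if gridAt grid (PySem.Int.mod (x + PySem.List.pyGetD dxPy d 0) R)
                           (PySem.Int.mod (y + PySem.List.pyGetD dyPy d 0) C) = 'L' then PySem.Int.mod (d + 1) 4
             else if gridAt grid (PySem.Int.mod (x + PySem.List.pyGetD dxPy d 0) R)
                           (PySem.Int.mod (y + PySem.List.pyGetD dyPy d 0) C) = 'R' then PySem.Int.mod (d - 1) 4
             else d) := by
  obtain ⟨h1, h2, h3, h4, h5, h6⟩ := h
  unfold bSucc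
  rw [dec_d h5 h6, dec_y h3 h4 h5 h6, dec_x h3 h4 h5 h6]
  rfl

-- the stepped state stays in range
lemma step_in (grid : List String) {R C : Nat} {x y d : Int} (hR : 0 < R) (hC : 0 < C) (h : InSt R C x y d) :
    InSt R C (PySem.Int.mod (x + PySem.List.pyGetD dxPy d 0) R)
             (PySem.Int.mod (y + PySem.List.pyGetD dyPy d 0) C)
             (if gridAt grid (PySem.Int.mod (x + PySem.List.pyGetD dxPy d 0) R)
                           (PySem.Int.mod (y + PySem.List.pyGetD dyPy d 0) C) = 'S' then d
             else if gridAt grid (PySem.Int.mod (x + PySem.List.pyGetD dxPy d 0) R)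
                           (PySem.Int.mod (y + PySem.List.pyGetD dyPy d 0) C) = 'L' then PySem.Int.mod (d + 1) 4
             else if gridAt grid (PySem.Int.mod (x + PySem.List.pyGetD dxPy d 0) R)
                           (PySem.Int.mod (y + PySem.List.pyGetD dyPy d 0) C) = 'R' then PySem.Int.mod (d - 1) 4
             else d) := by
  obtain ⟨h1, h2, h3, h4, h5, h6⟩ := h
  have hRi : (0:Int) < R := by exact_mod_cast hR
  have hCi : (0:Int) < C := by exact_mod_cast hC
  refine ⟨PySem.Int.mod_nonneg _ hRi, PySem.Int.mod_lt _ hRi,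
          PySem.Int.mod_nonneg _ hCi, PySem.Int.mod_lt _ hCi, ?_, ?_⟩ <;>
    split_ifs <;>
      first
        | omega
        | exact PySem.Int.mod_nonneg _ (by norm_num)
        | exact PySem.Int.mod_lt _ (by norm_num)

-- a pyGetD after a pySetD, with plain nonnegative Int indices
lemma pyGetD_pySetD_int {α : Type} {xs : List α} {i : Int} (v dflt : α)
    (h0 : 0 ≤ i) (h : i < xs.length) (m : Int) (hm0 : 0 ≤ m) :
    PySem.List.pyGetD (PySem.List.pySetD xs i v) m dflt =
      if m = i then v else PySem.List.pyGetD xs m dflt := by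
  have hi : i = (i.toNat : Int) := (Int.toNat_of_nonneg h0).symm
  have hm : m = (m.toNat : Int) := (Int.toNat_of_nonneg hm0).symm
  rw [hi, hm, PySem.List.pyGetD_pySetD_natCast _ _ _ _ _ (by omega)]
  by_cases hc : m.toNat = i.toNat
  · simp [hc]
  · simp only [hc, if_false]
    rw [if_neg (by omega)]

lemma pyGetD_pySetD_general {α : Type} {xs : List α} {i : Int} (v dflt : α)
    (h0 : 0 ≤ i) (h : i < xs.length) (m : Int) (hm0 : 0 ≤ m) (_hm : m < xs.length) :
    PySem.List.pyGetD (PySem.List.pySetD xs i v) m dflt =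
      if m = i then v else PySem.List.pyGetD xs m dflt :=
  pyGetD_pySetD_int v dflt h0 h m hm0

lemma shape_checkSet {R C : Nat} {check : List (List (List Bool))} {x y d : Int}
    (hs : Shape R C check) (h : InSt R C x y d) : Shape R C (checkSet check x y d) := by
  obtain ⟨hlen, hrows⟩ := hs
  obtain ⟨h1, h2, h3, h4, h5, h6⟩ := h
  have hxlt : x < (check.length : Int) := by omega
  have hrowm : PySem.List.pyGetD check x [] ∈ check := by
    rw [PySem.List.pyGetD_eq_getElem _ _ h1 hxlt]; exact List.getElem_mem _
  obtain ⟨hrl, hcells⟩ := hrows _ hrowm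
  have hylt : y < ((PySem.List.pyGetD check x []).length : Int) := by omega
  have hcellm : PySem.List.pyGetD (PySem.List.pyGetD check x []) y [] ∈ PySem.List.pyGetD check x [] := by
    rw [PySem.List.pyGetD_eq_getElem _ _ h3 hylt]; exact List.getElem_mem _
  have hcl := hcells _ hcellm
  unfold checkSet
  rw [PySem.List.pySetD_of_nonneg _ _ h1, PySem.List.pySetD_of_nonneg _ _ h3, PySem.List.pySetD_of_nonneg _ _ h5]
  refine ⟨by simpa using hlen, ?_⟩
  intro row hrow
  rcases List.mem_or_eq_of_mem_set hrow with hmem | heq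
  · exact hrows _ hmem
  · subst heq
    refine ⟨by simpa using hrl, ?_⟩
    intro cell hcell
    rcases List.mem_or_eq_of_mem_set hcell with hmem | heq
    · exact hcells _ hmem
    · subst heq; simpa using hcl

lemma checkAt_checkSet {R C : Nat} {check : List (List (List Bool))} {x y d x' y' d' : Int}
    (hs : Shape R C check) (h : InSt R C x y d) (h' : InSt R C x' y' d') :
    checkAt (checkSet check x y d) x' y' d' =
      if x' = x ∧ y' = y ∧ d' = d then true else checkAt check x' y' d' := by
  obtain ⟨hlen, hrows⟩ := hs
  obtain ⟨h1, h2, h3, h4, h5, h6⟩ := h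
  obtain ⟨h1', h2', h3', h4', h5', h6'⟩ := h'
  have hxlt : x < (check.length : Int) := by omega
  have hxlt' : x' < (check.length : Int) := by omega
  have hrowm : PySem.List.pyGetD check x [] ∈ check := by
    rw [PySem.List.pyGetD_eq_getElem _ _ h1 hxlt]; exact List.getElem_mem _
  obtain ⟨hrl, hcells⟩ := hrows _ hrowm
  have hrowm' : PySem.List.pyGetD check x' [] ∈ check := by
    rw [PySem.List.pyGetD_eq_getElem _ _ h1' hxlt']; exact List.getElem_mem _
  obtain ⟨hrl', hcells'⟩ := hrows _ hrowm'
  have hylt : y < ((PySem.List.pyGetD check x []).length : Int) := by omega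
  have hcellm : PySem.List.pyGetD (PySem.List.pyGetD check x []) y [] ∈ PySem.List.pyGetD check x [] := by
    rw [PySem.List.pyGetD_eq_getElem _ _ h3 hylt]; exact List.getElem_mem _
  have hcl := hcells _ hcellm
  unfold checkAt checkSet
  rw [pyGetD_pySetD_general _ _ h1 hxlt x' h1' hxlt']
  by_cases hx : x' = x
  · subst hx
    rw [if_pos rfl]
    rw [pyGetD_pySetD_general _ _ h3 (by omega) y' h3' (by omega)]
    by_cases hy : y' = y
    · subst hy
      rw [if_pos rfl]
      rw [pyGetD_pySetD_general _ _ h5 (by omega) d' h5' (by omega)]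
      by_cases hd : d' = d
      · subst hd; simp
      · simp [hd]
    · simp [hy]
  · simp [hx]

lemma storeInv_set {R C : Nat} {check : List (List (List Bool))} {visited : List Bool} {x y d : Int}
    (hI : StoreInv R C check visited) (h : InSt R C x y d) :
    StoreInv R C (checkSet check x y d) (PySem.List.pySetD visited (enc C x y d) true) := by
  obtain ⟨hS, hL, hinv⟩ := hI
  have her := enc_range h
  have hLi0 : ((visited).length : Int) = 4 * (R:Int) * C := by rw [hL]; push_cast; ring
  refine ⟨shape_checkSet hS h, by rw [PySem.List.length_pySetD]; exact hL, ?_⟩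
  intro x' y' d' h'
  have her' := enc_range h'
  rw [checkAt_checkSet hS h h']
  rw [pyGetD_pySetD_int _ _ her.1 (by rw [hLi0]; exact her.2) _ her'.1]
  by_cases hc : x' = x ∧ y' = y ∧ d' = d
  · obtain ⟨e1, e2, e3⟩ := hc; subst e1; subst e2; subst e3; simp
  · rw [if_neg hc, if_neg, hinv _ _ _ h']
    intro he
    exact hc ⟨(enc_inj h' h he).1, (enc_inj h' h he).2.1, (enc_inj h' h he).2.2⟩

lemma storeInv_init (R C : Nat) :
    StoreInv R C (List.replicate R (List.replicate C (List.replicate 4 false)))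
                 (List.replicate (4 * R * C) false) := by
  refine ⟨⟨by simp, ?_⟩, by simp, ?_⟩
  · intro row hrow
    rw [List.eq_of_mem_replicate hrow]
    refine ⟨by simp, ?_⟩
    intro cell hcell
    rw [List.eq_of_mem_replicate hcell]; simp
  · intro x y d h
    obtain ⟨h1, h2, h3, h4, h5, h6⟩ := h
    have her := enc_range (R := R) (C := C) ⟨h1, h2, h3, h4, h5, h6⟩
    have hg : ((List.replicate (4 * R * C) false).length : Int) = 4 * (R:Int) * C := by
      simp
    unfold checkAt
    rw [PySem.List.pyGetD_eq_getElem _ _ h1 (by simp; omega)]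
    rw [List.getElem_replicate]
    rw [PySem.List.pyGetD_eq_getElem _ _ h3 (by simp; omega)]
    rw [List.getElem_replicate]
    rw [PySem.List.pyGetD_eq_getElem _ _ h5 (by simp; omega)]
    rw [List.getElem_replicate]
    rw [PySem.List.pyGetD_eq_getElem _ _ her.1 (by rw [hg]; exact her.2)]
    rw [List.getElem_replicate]

-- one-step bisimulation of A's inner while-loop with refB's
lemma walk_sim (grid : List String) (R C : Nat) (hR : 0 < R) (hC : 0 < C)
    (nxt : List Int)
    (hnxt : ∀ s : Int, 0 ≤ s → s < 4 * R * C → PySem.List.pyGetD nxt s 0 = bSucc grid R C s)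
    (sx sy sd : Int) (hs : InSt R C sx sy sd) :
    ∀ (fuel : Nat) (tx ty td cnt : Int) (check : List (List (List Bool))) (visited : List Bool),
      InSt R C tx ty td → 0 < cnt → StoreInv R C check visited →
      (aWalk grid R C sx sy sd fuel [(tx, ty, td)] cnt check).1
          = (refWalk nxt (enc C sx sy sd) fuel (enc C tx ty td) cnt visited).1
        ∧ StoreInv R C (aWalk grid R C sx sy sd fuel [(tx, ty, td)] cnt check).2
                       (refWalk nxt (enc C sx sy sd) fuel (enc C tx ty td) cnt visited).2 := by
  intro fuel
  induction fuel with
  | zero => intro tx ty td cnt check visited ht hcnt hI; exact ⟨rfl, hI.1, hI.2.1, hI.2.2⟩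
  | succ fuel ih =>
    intro tx ty td cnt check visited ht hcnt hI
    by_cases hb : enc C tx ty td = enc C sx sy sd
    · obtain ⟨e1, e2, e3⟩ := enc_inj ht hs hb
      subst e1; subst e2; subst e3
      rw [show aWalk grid R C tx ty td (fuel + 1) [(tx, ty, td)] cnt check = (cnt, check) by
            simp [aWalk]; omega]
      rw [show refWalk nxt (enc C tx ty td) (fuel + 1) (enc C tx ty td) cnt visited = (cnt, visited) by
            simp [refWalk]]
      exact ⟨rfl, hI⟩
    · have hnb : ¬(tx = sx ∧ ty = sy ∧ td = sd ∧ cnt ≠ 0) := by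
        rintro ⟨e1, e2, e3, _⟩; subst e1; subst e2; subst e3; exact hb rfl
      have hstep := step_in grid (x := tx) (y := ty) (d := td) hR hC ht
      have hsucc : PySem.List.pyGetD nxt (enc C tx ty td) 0 =
          enc C (PySem.Int.mod (tx + PySem.List.pyGetD dxPy td 0) R)
                (PySem.Int.mod (ty + PySem.List.pyGetD dyPy td 0) C)
                (if gridAt grid (PySem.Int.mod (tx + PySem.List.pyGetD dxPy td 0) R)
                               (PySem.Int.mod (ty + PySem.List.pyGetD dyPy td 0) C) = 'S' then td
                 else if gridAt grid (PySem.Int.mod (tx + PySem.List.pyGetD dxPy td 0) R)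
                               (PySem.Int.mod (ty + PySem.List.pyGetD dyPy td 0) C) = 'L' then PySem.Int.mod (td + 1) 4
                 else if gridAt grid (PySem.Int.mod (tx + PySem.List.pyGetD dxPy td 0) R)
                               (PySem.Int.mod (ty + PySem.List.pyGetD dyPy td 0) C) = 'R' then PySem.Int.mod (td - 1) 4
                 else td) := by
        rw [hnxt _ (enc_range ht).1 (enc_range ht).2, bSucc_enc ht]
      rw [show aWalk grid R C sx sy sd (fuel + 1) [(tx, ty, td)] cnt check =
            aWalk grid R C sx sy sd fuel
              [(PySem.Int.mod (tx + PySem.List.pyGetD dxPy td 0) R,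
                PySem.Int.mod (ty + PySem.List.pyGetD dyPy td 0) C,
                (if gridAt grid (PySem.Int.mod (tx + PySem.List.pyGetD dxPy td 0) R)
                               (PySem.Int.mod (ty + PySem.List.pyGetD dyPy td 0) C) = 'S' then td
                 else if gridAt grid (PySem.Int.mod (tx + PySem.List.pyGetD dxPy td 0) R)
                               (PySem.Int.mod (ty + PySem.List.pyGetD dyPy td 0) C) = 'L' then PySem.Int.mod (td + 1) 4
                 else if gridAt grid (PySem.Int.mod (tx + PySem.List.pyGetD dxPy td 0) R)
                               (PySem.Int.mod (ty + PySem.List.pyGetD dyPy td 0) C) = 'R' then PySem.Int.mod (td - 1) 4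
                 else td))] (cnt + 1)
              (checkSet check (PySem.Int.mod (tx + PySem.List.pyGetD dxPy td 0) R)
                (PySem.Int.mod (ty + PySem.List.pyGetD dyPy td 0) C)
                (if gridAt grid (PySem.Int.mod (tx + PySem.List.pyGetD dxPy td 0) R)
                               (PySem.Int.mod (ty + PySem.List.pyGetD dyPy td 0) C) = 'S' then td
                 else if gridAt grid (PySem.Int.mod (tx + PySem.List.pyGetD dxPy td 0) R)
                               (PySem.Int.mod (ty + PySem.List.pyGetD dyPy td 0) C) = 'L' then PySem.Int.mod (td + 1) 4
                 else if gridAt grid (PySem.Int.mod (tx + PySem.List.pyGetD dxPy td 0) R)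
                               (PySem.Int.mod (ty + PySem.List.pyGetD dyPy td 0) C) = 'R' then PySem.Int.mod (td - 1) 4
                 else td)) by
            simp only [aWalk, if_neg hnb]; rfl]
      rw [show refWalk nxt (enc C sx sy sd) (fuel + 1) (enc C tx ty td) cnt visited =
            refWalk nxt (enc C sx sy sd) fuel (PySem.List.pyGetD nxt (enc C tx ty td) 0) (cnt + 1)
              (PySem.List.pySetD visited (PySem.List.pyGetD nxt (enc C tx ty td) 0) true) by
            simp only [refWalk, if_neg hb]]
      rw [hsucc]
      exact ih _ _ _ _ _ _ hstep (by omega) (storeInv_set hI hstep)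

-- proof-layer loop bodies (definitionally the bodies of A's and refB's outer loops)
def aBody (grid : List String) (R C : Int) (fuel : Nat)
    (st : List Int × List (List (List Bool))) (p : Int × Int × Int) :
    List Int × List (List (List Bool)) :=
  if checkAt st.2 p.1 p.2.1 p.2.2 then st
  else
    let r := aWalk grid R C p.1 p.2.1 p.2.2 fuel [(p.1, p.2.1, p.2.2)] 0 (checkSet st.2 p.1 p.2.1 p.2.2)
    (st.1 ++ [r.1], r.2)

def refBody (nxt : List Int) (fuel : Nat) (st : List Int × List Bool) (s : Int) :
    List Int × List Bool :=
  if PySem.List.pyGetD st.2 s false then st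
  else
    let t := PySem.List.pyGetD nxt s 0
    let r := refWalk nxt s fuel t 1 (PySem.List.pySetD (PySem.List.pySetD st.2 s true) t true)
    (st.1 ++ [r.1], r.2)

-- the common one-step successor, named once for the proofs
def stepT (grid : List String) (R C : Int) (x y d : Int) : Int × Int × Int :=
  let kx := PySem.Int.mod (x + PySem.List.pyGetD dxPy d 0) R
  let ky := PySem.Int.mod (y + PySem.List.pyGetD dyPy d 0) C
  let g := gridAt grid kx ky
  (kx, ky, if g = 'S' then d else if g = 'L' then PySem.Int.mod (d + 1) 4
    else if g = 'R' then PySem.Int.mod (d - 1) 4 else d)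

lemma step_in' (grid : List String) {R C : Nat} {x y d : Int} (hR : 0 < R) (hC : 0 < C)
    (h : InSt R C x y d) :
    InSt R C (stepT grid R C x y d).1 (stepT grid R C x y d).2.1 (stepT grid R C x y d).2.2 :=
  step_in grid hR hC h

lemma bSucc_enc' (grid : List String) {R C : Nat} {x y d : Int} (h : InSt R C x y d) :
    bSucc grid R C (enc C x y d)
      = enc C (stepT grid R C x y d).1 (stepT grid R C x y d).2.1 (stepT grid R C x y d).2.2 :=
  bSucc_enc h

lemma aWalk_start (grid : List String) (R C x y d : Int) (fuel : Nat)
    (check : List (List (List Bool))) :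
    aWalk grid R C x y d (fuel + 1) [(x, y, d)] 0 check
      = aWalk grid R C x y d fuel [stepT grid R C x y d] 1
          (checkSet check (stepT grid R C x y d).1 (stepT grid R C x y d).2.1
            (stepT grid R C x y d).2.2) := by
  simp only [aWalk]
  rfl

lemma range_flat (a b : Nat) :
    List.range (a * b) = (List.range a).flatMap (fun x => (List.range b).map (fun y => x * b + y)) := by
  induction a with
  | zero => simp
  | succ a ih =>
    rw [Nat.succ_mul, List.range_add, ih, List.range_succ, List.flatMap_append]
    simp

def stateList (R C : Nat) : List (Int × Int × Int) :=
  (List.range R).flatMap (fun (x : Nat) => (List.range C).flatMap (fun (y : Nat) =>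
    (List.range 4).map (fun (d : Nat) => ((x : Int), (y : Int), (d : Int)))))

lemma mem_stateList {R C : Nat} {p : Int × Int × Int} (h : p ∈ stateList R C) :
    InSt R C p.1 p.2.1 p.2.2 := by
  simp [stateList] at h
  obtain ⟨x, hx, y, hy, d, hd, rfl⟩ := h
  unfold InSt
  simp
  omega

lemma stateList_enc (R C : Nat) :
    (stateList R C).map (fun p => enc C p.1 p.2.1 p.2.2)
      = (List.range (4 * R * C)).map (fun (k : Nat) => (k : Int)) := by
  have h4 : 4 * R * C = R * (C * 4) := by ring
  rw [h4, range_flat R (C * 4)]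
  unfold stateList
  simp only [List.map_flatMap, List.map_map]
  apply List.flatMap_congr
  intro x _
  rw [range_flat C 4]
  simp only [List.map_flatMap, List.map_map]
  apply List.flatMap_congr
  intro y _
  apply List.map_congr_left
  intro d _
  simp only [Function.comp]
  unfold enc
  push_cast
  ring

lemma foldl3 {σ : Type} (f : σ → Int × Int × Int → σ) (R C : Nat) (init : σ) :
    (List.range R).foldl (fun st (x : Nat) => (List.range C).foldl (fun st (y : Nat) =>
        (List.range 4).foldl (fun st (d : Nat) => f st ((x : Int), (y : Int), (d : Int))) st) st) init
      = (stateList R C).foldl f init := by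
  unfold stateList
  rw [List.foldl_flatMap]
  apply PySem.List.foldl_congr_mem
  intro acc x _
  rw [List.foldl_flatMap]
  apply PySem.List.foldl_congr_mem
  intro acc' y _
  rw [List.foldl_map]

lemma outer_sim (grid : List String) (R C : Nat) (hR : 0 < R) (hC : 0 < C)
    (nxt : List Int)
    (hnxt : ∀ s : Int, 0 ≤ s → s < 4 * R * C → PySem.List.pyGetD nxt s 0 = bSucc grid R C s) :
    ∀ (ts : List (Int × Int × Int)), (∀ p ∈ ts, InSt R C p.1 p.2.1 p.2.2) →
    ∀ (res : List Int) (check : List (List (List Bool))) (visited : List Bool),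
      StoreInv R C check visited →
      (ts.foldl (aBody grid R C (4 * R * C + 2)) (res, check)).1
          = (ts.foldl (fun st p => refBody nxt (4 * R * C + 1) st (enc C p.1 p.2.1 p.2.2)) (res, visited)).1
        ∧ StoreInv R C (ts.foldl (aBody grid R C (4 * R * C + 2)) (res, check)).2
            (ts.foldl (fun st p => refBody nxt (4 * R * C + 1) st (enc C p.1 p.2.1 p.2.2)) (res, visited)).2 := by
  intro ts
  induction ts with
  | nil => intro _ res check visited hI; exact ⟨rfl, hI⟩
  | cons p ts ih =>
    intro hmem res check visited hI
    obtain ⟨px, py, pd⟩ := p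
    have hp : InSt R C px py pd := hmem _ List.mem_cons_self
    have hcond : checkAt check px py pd = PySem.List.pyGetD visited (enc C px py pd) false :=
      hI.2.2 _ _ _ hp
    simp only [List.foldl_cons]
    by_cases hv : checkAt check px py pd = true
    · rw [show aBody grid R C (4 * R * C + 2) (res, check) (px, py, pd) = (res, check) by
            simp [aBody, hv]]
      rw [show refBody nxt (4 * R * C + 1) (res, visited) (enc C px py pd) = (res, visited) by
            simp [refBody, ← hcond, hv]]
      exact ih (fun q hq => hmem q (List.mem_cons_of_mem _ hq)) res check visited hI
    · have hv' : checkAt check px py pd = false := by simpa using hv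
      have hstep := step_in' grid (x := px) (y := py) (d := pd) hR hC hp
      have hI1 := storeInv_set hI hp
      have hI2 := storeInv_set hI1 hstep
      have hw := walk_sim grid R C hR hC nxt hnxt px py pd hp (4 * R * C + 1)
        (stepT grid R C px py pd).1 (stepT grid R C px py pd).2.1 (stepT grid R C px py pd).2.2 1
        (checkSet (checkSet check px py pd) (stepT grid R C px py pd).1
          (stepT grid R C px py pd).2.1 (stepT grid R C px py pd).2.2)
        (PySem.List.pySetD (PySem.List.pySetD visited (enc C px py pd) true)
          (enc C (stepT grid R C px py pd).1 (stepT grid R C px py pd).2.1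
            (stepT grid R C px py pd).2.2) true)
        hstep one_pos hI2
      have hA : aBody grid R C (4 * R * C + 2) (res, check) (px, py, pd)
          = (res ++ [(aWalk grid R C px py pd (4 * R * C + 1) [(stepT grid R C px py pd)] 1
              (checkSet (checkSet check px py pd) (stepT grid R C px py pd).1
                (stepT grid R C px py pd).2.1 (stepT grid R C px py pd).2.2)).1],
             (aWalk grid R C px py pd (4 * R * C + 1) [(stepT grid R C px py pd)] 1
              (checkSet (checkSet check px py pd) (stepT grid R C px py pd).1
                (stepT grid R C px py pd).2.1 (stepT grid R C px py pd).2.2)).2) := by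
        simp only [aBody, hv', Bool.false_eq_true, if_false]
        rw [show (4 : Nat) * R * C + 2 = (4 * R * C + 1) + 1 from rfl, aWalk_start]
      have hB : refBody nxt (4 * R * C + 1) (res, visited) (enc C px py pd)
          = (res ++ [(refWalk nxt (enc C px py pd) (4 * R * C + 1)
              (enc C (stepT grid R C px py pd).1 (stepT grid R C px py pd).2.1
                (stepT grid R C px py pd).2.2) 1
              (PySem.List.pySetD (PySem.List.pySetD visited (enc C px py pd) true)
                (enc C (stepT grid R C px py pd).1 (stepT grid R C px py pd).2.1
                  (stepT grid R C px py pd).2.2) true)).1],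
             (refWalk nxt (enc C px py pd) (4 * R * C + 1)
              (enc C (stepT grid R C px py pd).1 (stepT grid R C px py pd).2.1
                (stepT grid R C px py pd).2.2) 1
              (PySem.List.pySetD (PySem.List.pySetD visited (enc C px py pd) true)
                (enc C (stepT grid R C px py pd).1 (stepT grid R C px py pd).2.1
                  (stepT grid R C px py pd).2.2) true)).2) := by
        simp only [refBody, ← hcond, hv', Bool.false_eq_true, if_false]
        rw [hnxt _ (enc_range hp).1 (enc_range hp).2, bSucc_enc' grid hp]
      rw [hA, hB]
      have hq : [((stepT grid R C px py pd).1, (stepT grid R C px py pd).2.1,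
          (stepT grid R C px py pd).2.2)] = [stepT grid R C px py pd] := by simp
      rw [hq] at hw
      obtain ⟨hcnt, hIw⟩ := hw
      rw [hcnt]
      exact ih (fun q hq => hmem q (List.mem_cons_of_mem _ hq)) _ _ _ hIw

lemma B_fold (bnxt : List Int) (fuelB : Nat) (R C : Nat) (init : List Int × List Bool) :
    (stateList R C).foldl (fun st p => refBody bnxt fuelB st (enc C p.1 p.2.1 p.2.2)) init
      = (List.range (4 * R * C)).foldl (fun st (k : Nat) => refBody bnxt fuelB st (k : Int)) init := by
  rw [← List.foldl_map (f := fun (p : Int × Int × Int) => enc C p.1 p.2.1 p.2.2)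
        (g := refBody bnxt fuelB), stateList_enc, List.foldl_map]

theorem solution_eq_refB (grid : List String) : solution grid = refB grid := by
  rcases grid with _ | ⟨h0, t⟩
  · rfl
  · have hn : (4 : Int) * ((h0 :: t : List String).length : Int) * (h0.toList.length : Int)
        = ((4 * (h0 :: t : List String).length * h0.toList.length : Nat) : Int) := by push_cast; ring
    simp only [solution, refB, PySem.List.len_eq, PySem.List.pyGet?_zero_cons,
      Option.getD_some, PySem.Str.len_eq, Int.toNat_natCast, hn]
    generalize hRn : (h0 :: t : List String).length = Rn
    generalize hCn : h0.toList.length = Cn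
    have hR : 0 < Rn := hRn ▸ Nat.succ_pos t.length
    rcases Nat.eq_zero_or_pos Cn with hC0 | hC
    · subst hC0
      simp only [Nat.mul_zero, Nat.cast_zero, PySem.List.pyRange_one_eq_nil (le_refl (0 : Int)),
        List.foldl_nil, PySem.List.foldl_ignore, List.map_nil]
    · set nxt := (PySem.List.pyRange 0 ((4 * Rn * Cn : Nat) : Int)).map
        (bSucc (h0 :: t) ((Rn : Nat) : Int) ((Cn : Nat) : Int)) with hnxtdef
      have hnxt : ∀ s : Int, 0 ≤ s → s < 4 * Rn * Cn →
          PySem.List.pyGetD nxt s 0 = bSucc (h0 :: t) Rn Cn s := by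
        intro s h0s hs
        rw [hnxtdef]
        exact PySem.List.pyGetD_map_pyRange_of_nonneg _ _ _ _ h0s (by exact_mod_cast hs)
      have H := outer_sim (h0 :: t) Rn Cn hR hC nxt hnxt (stateList Rn Cn)
        (fun p hp => mem_stateList hp) []
        (List.replicate Rn (List.replicate Cn (List.replicate 4 false)))
        (List.replicate (4 * Rn * Cn) false) (storeInv_init Rn Cn)
      rw [PySem.List.pyRange_zero_natCast Rn, PySem.List.pyRange_zero_natCast Cn,
        PySem.List.pyRange_zero_natCast (4 * Rn * Cn),
        show (4 : Int) = ((4 : Nat) : Int) from rfl, PySem.List.pyRange_zero_natCast 4]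
      simp only [List.foldl_map]
      refine congrArg (fun l => PySem.List.sorted l (fun v => v) false) ?_
      refine Eq.trans (congrArg Prod.fst
          (foldl3 (aBody (h0 :: t) Rn Cn (4 * Rn * Cn + 2)) Rn Cn _)) ?_
      refine Eq.trans H.1 ?_
      exact congrArg Prod.fst (B_fold nxt (4 * Rn * Cn + 1) Rn Cn _)

-- ---------- Part 2: refB equals B (cycle counting) under Pre_ ----------

-- countP bridge

lemma card_filter_countP (n : ℕ) (p : ℕ → Bool) :
    ((Finset.range n).filter (fun a => p a = true)).card = (List.range n).countP p := by
  simp [Finset.filter, Finset.card, Finset.range, Multiset.range, Multiset.filter, List.countP_eq_length_filter]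

lemma count_replicate' (k : ℕ) (L v : Int) : (List.replicate k L).count v = if v = L then k else 0 := by
  rw [List.count_replicate]
  by_cases h : v = L
  · simp [h]
  · simp [h]
    intro h'
    exact absurd h'.symm h

lemma count_flatMap' (l : List Int) (g : Int → List Int) (v : Int) :
    (l.flatMap g).count v = (l.map (fun a => (g a).count v)).sum := by
  induction l with
  | nil => simp
  | cons a l ih => simp [List.flatMap_cons, List.count_append, ih]

-- ---- abstract development: F : ℕ → ℕ mapping [0,n) injectively into itself ----

def perF (F : ℕ → ℕ) (n s : ℕ) : ℕ :=
  if h : ∃ L, L ≤ n ∧ 0 < L ∧ F^[L] s = s then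
    Nat.find (p := fun L => 0 < L ∧ F^[L] s = s) (h.imp (fun _ hL => ⟨hL.2.1, hL.2.2⟩))
  else 0

def orbF (F : ℕ → ℕ) (n s : ℕ) : Finset ℕ := (Finset.range (perF F n s)).image (fun k => F^[k] s)

def omin (F : ℕ → ℕ) (n s : ℕ) : ℕ :=
  if h : (orbF F n s).Nonempty then (orbF F n s).min' h else s

lemma iter_lt (F : ℕ → ℕ) (n : ℕ) (hm : ∀ s < n, F s < n) :
    ∀ (k s : ℕ), s < n → F^[k] s < n := by
  intro k
  induction k with
  | zero => intro s hs; simpa using hs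
  | succ k ih =>
    intro s hs
    rw [Function.iterate_succ_apply]
    exact ih _ (hm _ hs)

lemma iter_inj (F : ℕ → ℕ) (n : ℕ) (hm : ∀ s < n, F s < n)
    (hinj : ∀ s < n, ∀ t < n, F s = F t → s = t) :
    ∀ (k s t : ℕ), s < n → t < n → F^[k] s = F^[k] t → s = t := by
  intro k
  induction k with
  | zero => intro s t _ _ h; simpa using h
  | succ k ih =>
    intro s t hs ht h
    rw [Function.iterate_succ_apply, Function.iterate_succ_apply] at h
    exact hinj _ hs _ ht (ih _ _ (hm _ hs) (hm _ ht) h)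

lemma exists_return (F : ℕ → ℕ) (n : ℕ) (hm : ∀ s < n, F s < n)
    (hinj : ∀ s < n, ∀ t < n, F s = F t → s = t) (s : ℕ) (hs : s < n) :
    ∃ L, 0 < L ∧ L ≤ n ∧ F^[L] s = s := by
  have hmap : ∀ k ∈ Finset.range (n + 1), F^[k] s ∈ Finset.range n := by
    intro k _
    exact Finset.mem_range.2 (iter_lt F n hm k s hs)
  obtain ⟨i, hi, j, hj, hne, heq⟩ :=
    Finset.exists_ne_map_eq_of_card_lt_of_maps_to (by simp) hmap
  rcases Nat.lt_or_ge i j with hlt | hge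
  · refine ⟨j - i, by omega, by simp at hj; omega, ?_⟩
    have : F^[i] (F^[j-i] s) = F^[i] s := by
      rw [← Function.iterate_add_apply]
      rw [show i + (j - i) = j by omega]
      exact heq.symm
    exact iter_inj F n hm hinj i _ s (iter_lt F n hm _ s hs) hs this
  · have hlt : j < i := by omega
    refine ⟨i - j, by omega, by simp at hi; omega, ?_⟩
    have : F^[j] (F^[i-j] s) = F^[j] s := by
      rw [← Function.iterate_add_apply]
      rw [show j + (i - j) = i by omega]
      exact heq
    exact iter_inj F n hm hinj j _ s (iter_lt F n hm _ s hs) hs this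

-- basic facts about perF under the hypotheses
lemma perF_spec (F : ℕ → ℕ) (n : ℕ) (hm : ∀ s < n, F s < n)
    (hinj : ∀ s < n, ∀ t < n, F s = F t → s = t) (s : ℕ) (hs : s < n) :
    0 < perF F n s ∧ perF F n s ≤ n ∧ F^[perF F n s] s = s ∧
      ∀ k, 0 < k → k < perF F n s → F^[k] s ≠ s := by
  obtain ⟨L, hL0, hLn, hLe⟩ := exists_return F n hm hinj s hs
  have hex : ∃ L, L ≤ n ∧ 0 < L ∧ F^[L] s = s := ⟨L, hLn, hL0, hLe⟩
  have hex' : ∃ L, 0 < L ∧ F^[L] s = s := hex.imp (fun _ hL => ⟨hL.2.1, hL.2.2⟩)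
  unfold perF
  rw [dif_pos hex]
  have hfind := Nat.find_spec hex'
  refine ⟨hfind.1, ?_, hfind.2, ?_⟩
  · exact le_trans (Nat.find_min' hex' ⟨hL0, hLe⟩) hLn
  · intro k hk0 hklt heq
    exact Nat.find_min hex' hklt ⟨hk0, heq⟩

lemma iterate_per_mul (F : ℕ → ℕ) (n : ℕ) (hm : ∀ s < n, F s < n)
    (hinj : ∀ s < n, ∀ t < n, F s = F t → s = t) (s : ℕ) (hs : s < n) (q : ℕ) :
    F^[perF F n s * q] s = s := by
  induction q with
  | zero => simp
  | succ q ih =>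
    rw [Nat.mul_succ, Function.iterate_add_apply, (perF_spec F n hm hinj s hs).2.2.1, ih]

lemma iterate_mod (F : ℕ → ℕ) (n : ℕ) (hm : ∀ s < n, F s < n)
    (hinj : ∀ s < n, ∀ t < n, F s = F t → s = t) (s : ℕ) (hs : s < n) (k : ℕ) :
    F^[k] s = F^[k % perF F n s] s := by
  conv_lhs => rw [show k = k % perF F n s + perF F n s * (k / perF F n s) from (Nat.mod_add_div k _).symm]
  rw [Function.iterate_add_apply, iterate_per_mul F n hm hinj s hs]

lemma mem_orbF (F : ℕ → ℕ) (n : ℕ) (hm : ∀ s < n, F s < n)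
    (hinj : ∀ s < n, ∀ t < n, F s = F t → s = t) (s : ℕ) (hs : s < n) (k : ℕ) :
    F^[k] s ∈ orbF F n s := by
  unfold orbF
  refine Finset.mem_image.2 ⟨k % perF F n s, Finset.mem_range.2 ?_, (iterate_mod F n hm hinj s hs k).symm⟩
  exact Nat.mod_lt _ (perF_spec F n hm hinj s hs).1

lemma orbF_mem_iff (F : ℕ → ℕ) (n : ℕ) (hm : ∀ s < n, F s < n)
    (hinj : ∀ s < n, ∀ t < n, F s = F t → s = t) (s : ℕ) (hs : s < n) (j : ℕ) :
    j ∈ orbF F n s ↔ ∃ k, F^[k] s = j := by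
  constructor
  · intro h
    obtain ⟨k, _, hk⟩ := Finset.mem_image.1 h
    exact ⟨k, hk⟩
  · rintro ⟨k, rfl⟩
    exact mem_orbF F n hm hinj s hs k

lemma self_mem_orbF (F : ℕ → ℕ) (n : ℕ) (hm : ∀ s < n, F s < n)
    (hinj : ∀ s < n, ∀ t < n, F s = F t → s = t) (s : ℕ) (hs : s < n) :
    s ∈ orbF F n s := by
  have := mem_orbF F n hm hinj s hs 0
  simpa using this

-- period is invariant along the orbit
lemma perF_iterate (F : ℕ → ℕ) (n : ℕ) (hm : ∀ s < n, F s < n)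
    (hinj : ∀ s < n, ∀ t < n, F s = F t → s = t) (s : ℕ) (hs : s < n) (k : ℕ) :
    perF F n (F^[k] s) = perF F n s := by
  have hks : F^[k] s < n := iter_lt F n hm k s hs
  have hp := perF_spec F n hm hinj s hs
  have hq := perF_spec F n hm hinj (F^[k] s) hks
  -- F^[per s] fixes F^[k] s
  have h1 : F^[perF F n s] (F^[k] s) = F^[k] s := by
    rw [← Function.iterate_add_apply, Nat.add_comm, Function.iterate_add_apply, hp.2.2.1]
  -- F^[per (F^[k] s)] fixes s
  have h2 : F^[perF F n (F^[k] s)] s = s := by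
    have : F^[k] (F^[perF F n (F^[k] s)] s) = F^[k] s := by
      rw [← Function.iterate_add_apply, Nat.add_comm, Function.iterate_add_apply, hq.2.2.1]
    exact iter_inj F n hm hinj k _ s (iter_lt F n hm _ s hs) hs this
  by_contra hne
  rcases Nat.lt_or_ge (perF F n (F^[k] s)) (perF F n s) with hlt | hge
  · exact hp.2.2.2 _ hq.1 hlt h2
  · exact hq.2.2.2 _ hp.1 (by omega) h1

lemma orbF_iterate (F : ℕ → ℕ) (n : ℕ) (hm : ∀ s < n, F s < n)
    (hinj : ∀ s < n, ∀ t < n, F s = F t → s = t) (s : ℕ) (hs : s < n) (k : ℕ) :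
    orbF F n (F^[k] s) = orbF F n s := by
  have hks : F^[k] s < n := iter_lt F n hm k s hs
  apply Finset.ext
  intro j
  rw [orbF_mem_iff F n hm hinj _ hks, orbF_mem_iff F n hm hinj s hs]
  constructor
  · rintro ⟨i, rfl⟩
    exact ⟨i + k, by rw [Function.iterate_add_apply]⟩
  · rintro ⟨i, rfl⟩
    have hp := perF_spec F n hm hinj s hs
    have hk1 : k + 1 ≤ perF F n s * (k + 1) := Nat.le_mul_of_pos_left _ hp.1
    refine ⟨perF F n s * (k + 1) + i - k, ?_⟩
    rw [← Function.iterate_add_apply]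
    rw [show perF F n s * (k + 1) + i - k + k = i + perF F n s * (k + 1) by omega]
    rw [Function.iterate_add_apply, iterate_per_mul F n hm hinj s hs]

-- distinct elements below the period, hence the orbit has exactly perF elements
lemma orbF_card (F : ℕ → ℕ) (n : ℕ) (hm : ∀ s < n, F s < n)
    (hinj : ∀ s < n, ∀ t < n, F s = F t → s = t) (s : ℕ) (hs : s < n) :
    (orbF F n s).card = perF F n s := by
  have hp := perF_spec F n hm hinj s hs
  unfold orbF
  rw [Finset.card_image_of_injOn, Finset.card_range]
  intro i hi j hj hij
  simp only [Finset.coe_range, Set.mem_Iio] at hi hj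
  by_contra hne
  rcases Nat.lt_or_ge i j with hlt | hge
  · have : F^[i] (F^[j - i] s) = F^[i] s := by
      rw [← Function.iterate_add_apply, show i + (j - i) = j by omega]
      exact hij.symm
    exact hp.2.2.2 (j - i) (by omega) (by omega)
      (iter_inj F n hm hinj i _ s (iter_lt F n hm _ s hs) hs this)
  · have hlt : j < i := by omega
    have : F^[j] (F^[i - j] s) = F^[j] s := by
      rw [← Function.iterate_add_apply, show j + (i - j) = i by omega]
      exact hij
    exact hp.2.2.2 (i - j) (by omega) (by omega)
      (iter_inj F n hm hinj j _ s (iter_lt F n hm _ s hs) hs this)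

lemma omin_spec (F : ℕ → ℕ) (n : ℕ) (hm : ∀ s < n, F s < n)
    (hinj : ∀ s < n, ∀ t < n, F s = F t → s = t) (s : ℕ) (hs : s < n) :
    omin F n s ∈ orbF F n s ∧ ∀ j ∈ orbF F n s, omin F n s ≤ j := by
  have hne : (orbF F n s).Nonempty := ⟨s, self_mem_orbF F n hm hinj s hs⟩
  unfold omin
  rw [dif_pos hne]
  exact ⟨Finset.min'_mem _ _, fun j hj => Finset.min'_le _ _ hj⟩

lemma omin_le_self (F : ℕ → ℕ) (n : ℕ) (hm : ∀ s < n, F s < n)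
    (hinj : ∀ s < n, ∀ t < n, F s = F t → s = t) (s : ℕ) (hs : s < n) :
    omin F n s ≤ s :=
  (omin_spec F n hm hinj s hs).2 s (self_mem_orbF F n hm hinj s hs)

lemma omin_lt (F : ℕ → ℕ) (n : ℕ) (hm : ∀ s < n, F s < n)
    (hinj : ∀ s < n, ∀ t < n, F s = F t → s = t) (s : ℕ) (hs : s < n) :
    omin F n s < n := lt_of_le_of_lt (omin_le_self F n hm hinj s hs) hs

lemma omin_iterate (F : ℕ → ℕ) (n : ℕ) (hm : ∀ s < n, F s < n)
    (hinj : ∀ s < n, ∀ t < n, F s = F t → s = t) (s : ℕ) (hs : s < n) (k : ℕ) :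
    omin F n (F^[k] s) = omin F n s := by
  have hne : (orbF F n s).Nonempty := ⟨s, self_mem_orbF F n hm hinj s hs⟩
  unfold omin
  rw [orbF_iterate F n hm hinj s hs k, dif_pos hne, dif_pos hne]

-- omin is idempotent: the orbit minimum is a leader
lemma omin_omin (F : ℕ → ℕ) (n : ℕ) (hm : ∀ s < n, F s < n)
    (hinj : ∀ s < n, ∀ t < n, F s = F t → s = t) (s : ℕ) (hs : s < n) :
    omin F n (omin F n s) = omin F n s := by
  obtain ⟨hmem, _⟩ := omin_spec F n hm hinj s hs
  obtain ⟨k, hk⟩ := (orbF_mem_iff F n hm hinj s hs _).1 hmem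
  rw [← hk, omin_iterate F n hm hinj s hs k]
  exact hk.symm

lemma perF_omin (F : ℕ → ℕ) (n : ℕ) (hm : ∀ s < n, F s < n)
    (hinj : ∀ s < n, ∀ t < n, F s = F t → s = t) (s : ℕ) (hs : s < n) :
    perF F n (omin F n s) = perF F n s := by
  obtain ⟨hmem, _⟩ := omin_spec F n hm hinj s hs
  obtain ⟨k, hk⟩ := (orbF_mem_iff F n hm hinj s hs _).1 hmem
  rw [← hk, perF_iterate F n hm hinj s hs k]

lemma mem_orbF_omin (F : ℕ → ℕ) (n : ℕ) (hm : ∀ s < n, F s < n)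
    (hinj : ∀ s < n, ∀ t < n, F s = F t → s = t) (s : ℕ) (hs : s < n) :
    s ∈ orbF F n (omin F n s) := by
  obtain ⟨hmem, _⟩ := omin_spec F n hm hinj s hs
  obtain ⟨k, hk⟩ := (orbF_mem_iff F n hm hinj s hs _).1 hmem
  rw [← hk, orbF_iterate F n hm hinj s hs k]
  exact self_mem_orbF F n hm hinj s hs

-- the core counting identity
lemma count_per_eq (F : ℕ → ℕ) (n : ℕ) (hm : ∀ s < n, F s < n)
    (hinj : ∀ s < n, ∀ t < n, F s = F t → s = t) (V : ℕ) :
    ((Finset.range n).filter (fun s => perF F n s = V)).card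
      = V * ((Finset.range n).filter (fun m => omin F n m = m ∧ perF F n m = V)).card := by
  have hmaps : ∀ x ∈ (Finset.range n).filter (fun s => perF F n s = V),
      omin F n x ∈ (Finset.range n).filter (fun m => omin F n m = m ∧ perF F n m = V) := by
    intro x hx
    simp only [Finset.mem_filter, Finset.mem_range] at hx ⊢
    obtain ⟨hxn, hxper⟩ := hx
    refine ⟨omin_lt F n hm hinj x hxn, omin_omin F n hm hinj x hxn, ?_⟩
    rw [perF_omin F n hm hinj x hxn, hxper]
  rw [Finset.card_eq_sum_card_fiberwise hmaps]
  have hfib : ∀ m ∈ (Finset.range n).filter (fun m => omin F n m = m ∧ perF F n m = V),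
      (((Finset.range n).filter (fun s => perF F n s = V)).filter (fun x => omin F n x = m)).card = V := by
    intro m hmem
    simp only [Finset.mem_filter, Finset.mem_range] at hmem
    obtain ⟨hmn, hlead, hper⟩ := hmem
    have horb : ((Finset.range n).filter (fun s => perF F n s = V)).filter (fun x => omin F n x = m)
        = orbF F n m := by
      apply Finset.ext
      intro x
      simp only [Finset.mem_filter, Finset.mem_range]
      constructor
      · rintro ⟨⟨hxn, hxper⟩, hxmin⟩
        rw [← hxmin]
        exact mem_orbF_omin F n hm hinj x hxn
      · intro hx
        obtain ⟨k, hk⟩ := (orbF_mem_iff F n hm hinj m hmn _).1 hx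
        subst hk
        refine ⟨⟨iter_lt F n hm _ _ hmn, ?_⟩, ?_⟩
        · rw [perF_iterate F n hm hinj m hmn k, hper]
        · rw [omin_iterate F n hm hinj m hmn k, hlead]
    rw [horb, orbF_card F n hm hinj m hmn, hper]
  rw [Finset.sum_congr rfl hfib, Finset.sum_const, smul_eq_mul, Nat.mul_comm]


-- clenLoop computes the period of s (B's inner while-loop)
lemma clenLoop_eq (nxt : List Int) (F : ℕ → ℕ) (n : ℕ) (hm : ∀ s < n, F s < n)
    (hinj : ∀ s < n, ∀ t < n, F s = F t → s = t)
    (hnxt : ∀ s : ℕ, s < n → PySem.List.pyGetD nxt (s : ℤ) 0 = ((F s : ℕ) : ℤ))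
    (s : ℕ) (hs : s < n) :
    ∀ (fuel j : ℕ), 1 ≤ j → j ≤ perF F n s → perF F n s - j ≤ fuel →
      clenLoop nxt (s : ℤ) fuel ((F^[j] s : ℕ) : ℤ) (j : ℤ) = (perF F n s : ℤ) := by
  have hp := perF_spec F n hm hinj s hs
  intro fuel
  induction fuel with
  | zero =>
    intro j h1 h2 h3
    have hj : j = perF F n s := by omega
    subst hj
    simp [clenLoop]
  | succ fuel ih =>
    intro j h1 h2 h3
    by_cases hfix : F^[j] s = s
    · have hj : j = perF F n s := by
        by_contra hne
        exact hp.2.2.2 j (by omega) (by omega) hfix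
      subst hj
      have heqz : ((F^[perF F n s] s : ℕ) : ℤ) = (s : ℤ) := by exact_mod_cast hfix
      simp [clenLoop, heqz]
    · have hjlt : j < perF F n s := by
        rcases Nat.lt_or_ge j (perF F n s) with h | h
        · exact h
        · exfalso
          have : j = perF F n s := by omega
          exact hfix (this ▸ hp.2.2.1)
      have hne : ((F^[j] s : ℕ) : ℤ) ≠ (s : ℤ) := by
        intro h
        exact hfix (by exact_mod_cast h)
      simp only [clenLoop, if_neg hne]
      rw [hnxt _ (iter_lt F n hm j s hs)]
      rw [show (F (F^[j] s) : ℤ) = ((F^[j+1] s : ℕ) : ℤ) by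
        rw [Function.iterate_succ_apply']]
      rw [show (j : ℤ) + 1 = ((j + 1 : ℕ) : ℤ) by push_cast; ring]
      exact ih (j + 1) (by omega) (by omega) (by omega)

-- refWalk computes the period and marks exactly the rest of the orbit
lemma refWalk_eq (nxt : List Int) (F : ℕ → ℕ) (n : ℕ) (hm : ∀ s < n, F s < n)
    (hinj : ∀ s < n, ∀ t < n, F s = F t → s = t)
    (hnxt : ∀ s : ℕ, s < n → PySem.List.pyGetD nxt (s : ℤ) 0 = ((F s : ℕ) : ℤ))
    (s : ℕ) (hs : s < n) :
    ∀ (fuel j : ℕ) (v : List Bool), 1 ≤ j → j ≤ perF F n s → perF F n s - j ≤ fuel →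
      v.length = n →
      (refWalk nxt (s : ℤ) fuel ((F^[j] s : ℕ) : ℤ) (j : ℤ) v).1 = (perF F n s : ℤ)
      ∧ (refWalk nxt (s : ℤ) fuel ((F^[j] s : ℕ) : ℤ) (j : ℤ) v).2.length = n
      ∧ ∀ x : ℕ, x < n →
          (PySem.List.pyGetD (refWalk nxt (s : ℤ) fuel ((F^[j] s : ℕ) : ℤ) (j : ℤ) v).2 (x : ℤ) false = true
            ↔ (PySem.List.pyGetD v (x : ℤ) false = true
                ∨ ∃ k, j < k ∧ k ≤ perF F n s ∧ F^[k] s = x)) := by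
  have hp := perF_spec F n hm hinj s hs
  intro fuel
  induction fuel with
  | zero =>
    intro j v h1 h2 h3 hv
    have hj : j = perF F n s := by omega
    subst hj
    refine ⟨by simp [refWalk], by simpa [refWalk] using hv, ?_⟩
    intro x hx
    have hno : ¬ (∃ k, perF F n s < k ∧ k ≤ perF F n s ∧ F^[k] s = x) := by
      rintro ⟨k, hk1, hk2, _⟩; omega
    simp [refWalk, hno]
  | succ fuel ih =>
    intro j v h1 h2 h3 hv
    by_cases hfix : F^[j] s = s
    · have hj : j = perF F n s := by
        by_contra hne
        exact hp.2.2.2 j (by omega) (by omega) hfix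
      subst hj
      have heqz : ((F^[perF F n s] s : ℕ) : ℤ) = (s : ℤ) := by exact_mod_cast hfix
      refine ⟨?_, ?_, ?_⟩
      · simp [refWalk, heqz]
      · simpa [refWalk, heqz] using hv
      · intro x hx
        have hno : ¬ (∃ k, perF F n s < k ∧ k ≤ perF F n s ∧ F^[k] s = x) := by
          rintro ⟨k, hk1, hk2, _⟩; omega
        simp [refWalk, heqz, hno]
    · have hjlt : j < perF F n s := by
        rcases Nat.lt_or_ge j (perF F n s) with h | h
        · exact h
        · exfalso
          have : j = perF F n s := by omega
          exact hfix (this ▸ hp.2.2.1)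
      have hne : ((F^[j] s : ℕ) : ℤ) ≠ (s : ℤ) := by
        intro h
        exact hfix (by exact_mod_cast h)
      have hjn : F^[j] s < n := iter_lt F n hm j s hs
      have hj1n : F^[j+1] s < n := iter_lt F n hm (j+1) s hs
      have hsucc : PySem.List.pyGetD nxt ((F^[j] s : ℕ) : ℤ) 0 = ((F^[j+1] s : ℕ) : ℤ) := by
        rw [hnxt _ hjn, Function.iterate_succ_apply']
      have hv2 : (PySem.List.pySetD v ((F^[j+1] s : ℕ) : ℤ) true).length = n := by
        rw [PySem.List.length_pySetD, hv]
      have step : refWalk nxt (s : ℤ) (fuel + 1) ((F^[j] s : ℕ) : ℤ) (j : ℤ) v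
          = refWalk nxt (s : ℤ) fuel ((F^[j+1] s : ℕ) : ℤ) ((j + 1 : ℕ) : ℤ)
              (PySem.List.pySetD v ((F^[j+1] s : ℕ) : ℤ) true) := by
        simp only [refWalk, if_neg hne, hsucc, Nat.cast_add, Nat.cast_one]
      obtain ⟨ih1, ih2, ih3⟩ := ih (j + 1)
        (PySem.List.pySetD v ((F^[j+1] s : ℕ) : ℤ) true)
        (by omega) (by omega) (by omega) hv2
      refine ⟨by rw [step]; exact ih1, by rw [step]; exact ih2, ?_⟩
      intro x hx
      rw [step, ih3 x hx]
      rw [pyGetD_pySetD_int _ _ (by positivity) (by rw [hv]; exact_mod_cast hj1n) _ (by positivity)]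
      by_cases hxx : (x : ℤ) = ((F^[j+1] s : ℕ) : ℤ)
      · have hxn : x = F^[j+1] s := by exact_mod_cast hxx
        rw [if_pos hxx]
        constructor
        · intro _
          exact Or.inr ⟨j + 1, by omega, by omega, hxn.symm⟩
        · intro _
          exact Or.inl rfl
      · rw [if_neg hxx]
        have hxn : x ≠ F^[j+1] s := fun h => hxx (by exact_mod_cast h)
        constructor
        · rintro (h | ⟨k, hk1, hk2, hk3⟩)
          · exact Or.inl h
          · exact Or.inr ⟨k, by omega, hk2, hk3⟩
        · rintro (h | ⟨k, hk1, hk2, hk3⟩)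
          · exact Or.inl h
          · refine Or.inr ⟨k, ?_, hk2, hk3⟩
            have : k ≠ j + 1 := fun h' => hxn (h' ▸ hk3).symm
            omega


-- membership in the orbit with an exponent between 1 and the period
lemma mem_orbF_exists_le (F : ℕ → ℕ) (n : ℕ) (hm : ∀ s < n, F s < n)
    (hinj : ∀ s < n, ∀ t < n, F s = F t → s = t) (s : ℕ) (hs : s < n) (x : ℕ) :
    x ∈ orbF F n s ↔ ∃ k, 1 ≤ k ∧ k ≤ perF F n s ∧ F^[k] s = x := by
  have hp := perF_spec F n hm hinj s hs
  rw [orbF_mem_iff F n hm hinj s hs]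
  constructor
  · rintro ⟨k, rfl⟩
    rcases Nat.eq_zero_or_pos (k % perF F n s) with h0 | hpos
    · refine ⟨perF F n s, hp.1, le_refl _, ?_⟩
      rw [iterate_mod F n hm hinj s hs k, h0]
      simp [hp.2.2.1]
    · refine ⟨k % perF F n s, hpos, le_of_lt (Nat.mod_lt _ hp.1), ?_⟩
      rw [iterate_mod F n hm hinj s hs k]
  · rintro ⟨k, _, _, hk⟩
    exact ⟨k, hk⟩

-- x is in the orbit of a leader m iff m is x's orbit minimum
lemma omin_eq_iff_mem (F : ℕ → ℕ) (n : ℕ) (hm : ∀ s < n, F s < n)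
    (hinj : ∀ s < n, ∀ t < n, F s = F t → s = t) (m : ℕ) (hmn : m < n)
    (hlead : omin F n m = m) (x : ℕ) (hx : x < n) :
    omin F n x = m ↔ x ∈ orbF F n m := by
  constructor
  · intro h
    rw [← h]
    exact mem_orbF_omin F n hm hinj x hx
  · intro h
    obtain ⟨k, hk⟩ := (orbF_mem_iff F n hm hinj m hmn x).1 h
    rw [← hk, omin_iterate F n hm hinj m hmn k, hlead]

-- the leader-prefix answer list
def leadList (F : ℕ → ℕ) (n m : ℕ) : List Int :=
  ((List.range m).filter (fun s => omin F n s = s)).map (fun s => ((perF F n s : ℕ) : ℤ))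

-- the outer fold of refB collects the periods of the leaders, in order
lemma refFold_eq (nxt : List Int) (F : ℕ → ℕ) (n : ℕ) (hm : ∀ s < n, F s < n)
    (hinj : ∀ s < n, ∀ t < n, F s = F t → s = t)
    (hnxt : ∀ s : ℕ, s < n → PySem.List.pyGetD nxt (s : ℤ) 0 = ((F s : ℕ) : ℤ)) :
    ∀ m, m ≤ n →
      ((List.range m).foldl (fun st (k : ℕ) => refBody nxt (n + 1) st (k : ℤ))
          (([] : List Int), List.replicate n false)).1 = leadList F n m
      ∧ ((List.range m).foldl (fun st (k : ℕ) => refBody nxt (n + 1) st (k : ℤ))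
          (([] : List Int), List.replicate n false)).2.length = n
      ∧ ∀ x : ℕ, x < n →
          (PySem.List.pyGetD ((List.range m).foldl (fun st (k : ℕ) => refBody nxt (n + 1) st (k : ℤ))
              (([] : List Int), List.replicate n false)).2 (x : ℤ) false = true
            ↔ omin F n x < m) := by
  intro m
  induction m with
  | zero =>
    intro _
    refine ⟨rfl, by simp, ?_⟩
    intro x hx
    rw [PySem.List.pyGetD_eq_getElem _ _ (by positivity) (by simp; exact_mod_cast hx)]
    simp
  | succ m ih =>
    intro hmn
    obtain ⟨ih1, ih2, ih3⟩ := ih (by omega)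
    set st := (List.range m).foldl (fun st (k : ℕ) => refBody nxt (n + 1) st (k : ℤ))
        (([] : List Int), List.replicate n false) with hst
    rw [List.range_succ, List.foldl_append, List.foldl_cons, List.foldl_nil]
    have hmn' : m < n := by omega
    by_cases hvis : PySem.List.pyGetD st.2 (m : ℤ) false = true
    · -- m already visited: its orbit minimum is smaller, m is not a leader
      have hom : omin F n m < m := (ih3 m hmn').1 hvis
      have hnotlead : ¬ (omin F n m = m) := by omega
      have hbody : refBody nxt (n + 1) st (m : ℤ) = st := by
        unfold refBody
        rw [if_pos hvis]
      rw [hbody]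
      refine ⟨?_, ih2, ?_⟩
      · rw [ih1]
        unfold leadList
        rw [List.range_succ, List.filter_append, List.filter_cons]
        simp [hnotlead]
      · intro x hx
        rw [ih3 x hx]
        constructor
        · intro h; omega
        · intro h
          rcases Nat.lt_or_ge (omin F n x) m with h' | h'
          · exact h'
          · exfalso
            have hxm : omin F n x = m := by omega
            have : omin F n m = m := by
              have := omin_omin F n hm hinj x hx
              rw [hxm] at this
              exact this
            omega
    · -- m fresh: m is a leader, walk its whole orbit
      have homin : ¬ omin F n m < m := fun h => hvis ((ih3 m hmn').2 h)
      have hlead : omin F n m = m := by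
        have := omin_le_self F n hm hinj m hmn'
        omega
      have hp := perF_spec F n hm hinj m hmn'
      have hvisf : PySem.List.pyGetD st.2 (m : ℤ) false = false := by
        cases h : PySem.List.pyGetD st.2 (m : ℤ) false
        · rfl
        · exact absurd h hvis
      have htm : PySem.List.pyGetD nxt (m : ℤ) 0 = ((F^[1] m : ℕ) : ℤ) := by
        rw [hnxt m hmn']
        simp
      have hF1 : F^[1] m < n := iter_lt F n hm 1 m hmn'
      have hlen1 : (PySem.List.pySetD st.2 (m : ℤ) true).length = n := by
        rw [PySem.List.length_pySetD, ih2]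
      have hlen2 : (PySem.List.pySetD (PySem.List.pySetD st.2 (m : ℤ) true) ((F^[1] m : ℕ) : ℤ) true).length = n := by
        rw [PySem.List.length_pySetD, hlen1]
      obtain ⟨hw1, hw2, hw3⟩ := refWalk_eq nxt F n hm hinj hnxt m hmn' (n + 1) 1
        (PySem.List.pySetD (PySem.List.pySetD st.2 (m : ℤ) true) ((F^[1] m : ℕ) : ℤ) true)
        (le_refl 1) hp.1 (by omega) hlen2
      have hbody : refBody nxt (n + 1) st (m : ℤ)
          = (st.1 ++ [(refWalk nxt (m : ℤ) (n + 1) ((F^[1] m : ℕ) : ℤ) 1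
              (PySem.List.pySetD (PySem.List.pySetD st.2 (m : ℤ) true) ((F^[1] m : ℕ) : ℤ) true)).1],
             (refWalk nxt (m : ℤ) (n + 1) ((F^[1] m : ℕ) : ℤ) 1
              (PySem.List.pySetD (PySem.List.pySetD st.2 (m : ℤ) true) ((F^[1] m : ℕ) : ℤ) true)).2) := by
        unfold refBody
        rw [hvisf]
        simp only [Bool.false_eq_true, if_false, htm]
      rw [hbody]
      simp only [Nat.cast_one] at hw1 hw2 hw3
      refine ⟨?_, hw2, ?_⟩
      · rw [ih1, hw1]
        unfold leadList
        rw [List.range_succ, List.filter_append, List.filter_cons]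
        simp [hlead]
      · intro x hx
        rw [hw3 x hx]
        have hset : PySem.List.pyGetD (PySem.List.pySetD (PySem.List.pySetD st.2 (m : ℤ) true) ((F^[1] m : ℕ) : ℤ) true) (x : ℤ) false = true
            ↔ (PySem.List.pyGetD st.2 (x : ℤ) false = true ∨ x = m ∨ x = F^[1] m) := by
          rw [pyGetD_pySetD_int _ _ (by positivity) (by rw [hlen1]; exact_mod_cast hF1) _ (by positivity)]
          by_cases h1 : (x : ℤ) = ((F^[1] m : ℕ) : ℤ)
          · rw [if_pos h1]
            have hxeq : x = F^[1] m := by exact_mod_cast h1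
            constructor
            · intro _
              exact Or.inr (Or.inr hxeq)
            · intro _
              rfl
          · rw [if_neg h1]
            have hxne : x ≠ F^[1] m := fun h => h1 (by exact_mod_cast h)
            rw [pyGetD_pySetD_int _ _ (by positivity) (by rw [ih2]; exact_mod_cast hmn') _ (by positivity)]
            by_cases h2 : (x : ℤ) = (m : ℤ)
            · rw [if_pos h2]
              have hxeq2 : x = m := by exact_mod_cast h2
              constructor
              · intro _
                exact Or.inr (Or.inl hxeq2)
              · intro _
                rfl
            · rw [if_neg h2]
              have hxne2 : x ≠ m := fun h => h2 (by exact_mod_cast h)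
              have hxne' : x ≠ F m := by simpa using hxne
              simp [hxne', hxne2]
        rw [hset, ih3 x hx]
        have horb : (x = m ∨ x = F^[1] m ∨ ∃ k, 1 < k ∧ k ≤ perF F n m ∧ F^[k] m = x)
            ↔ x ∈ orbF F n m := by
          rw [mem_orbF_exists_le F n hm hinj m hmn']
          constructor
          · rintro (h | h | ⟨k, hk1, hk2, hk3⟩)
            · exact ⟨perF F n m, hp.1, le_refl _, hp.2.2.1.trans h.symm⟩
            · exact ⟨1, le_refl _, hp.1, h.symm⟩
            · exact ⟨k, by omega, hk2, hk3⟩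
          · rintro ⟨k, hk1, hk2, hk3⟩
            rcases Nat.eq_or_lt_of_le hk1 with h1 | h1
            · exact Or.inr (Or.inl (by rw [← hk3, ← h1]))
            · exact Or.inr (Or.inr ⟨k, h1, hk2, hk3⟩)
        have hminm : omin F n x = m ↔ x ∈ orbF F n m :=
          omin_eq_iff_mem F n hm hinj m hmn' hlead x hx
        constructor
        · rintro ((h | h | h) | ⟨k, hk1, hk2, hk3⟩)
          · omega
          · have : omin F n x = m := hminm.2 (horb.1 (Or.inl h))
            omega
          · have : omin F n x = m := hminm.2 (horb.1 (Or.inr (Or.inl h)))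
            omega
          · have : omin F n x = m := hminm.2 (horb.1 (Or.inr (Or.inr ⟨k, hk1, hk2, hk3⟩)))
            omega
        · intro h
          rcases Nat.lt_or_ge (omin F n x) m with h' | h'
          · exact Or.inl (Or.inl h')
          · have hxm : omin F n x = m := by omega
            rcases horb.2 (hminm.1 hxm) with h1 | h1 | ⟨k, hk1, hk2, hk3⟩
            · exact Or.inl (Or.inr (Or.inl h1))
            · exact Or.inl (Or.inr (Or.inr h1))
            · exact Or.inr ⟨k, hk1, hk2, hk3⟩



-- the per-state cycle-length list
def lensList (F : ℕ → ℕ) (n : ℕ) : List Int :=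
  (List.range n).map (fun k => ((perF F n k : ℕ) : ℤ))

-- B's counting fold produces Counter(lensList)
lemma alt_counts_eq (nxt : List Int) (F : ℕ → ℕ) (n : ℕ) (hm : ∀ s < n, F s < n)
    (hinj : ∀ s < n, ∀ t < n, F s = F t → s = t)
    (hnxt : ∀ s : ℕ, s < n → PySem.List.pyGetD nxt (s : ℤ) 0 = ((F s : ℕ) : ℤ)) :
    (List.range n).foldl (fun d (k : ℕ) =>
        d.modify (clenLoop nxt (k : ℤ) (n + 1) (PySem.List.pyGetD nxt (k : ℤ) 0) 1) 0 (· + 1))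
      PySem.Dict.empty
      = PySem.Dict.counter (lensList F n) := by
  have hcong : (List.range n).foldl (fun d (k : ℕ) =>
        d.modify (clenLoop nxt (k : ℤ) (n + 1) (PySem.List.pyGetD nxt (k : ℤ) 0) 1) 0 (· + 1))
      (PySem.Dict.empty : PySem.Dict ℤ ℤ)
      = (List.range n).foldl (fun d (k : ℕ) =>
        d.modify ((perF F n k : ℕ) : ℤ) 0 (· + 1)) (PySem.Dict.empty : PySem.Dict ℤ ℤ) := by
    apply PySem.List.foldl_congr_mem
    intro acc k hk
    have hkn : k < n := List.mem_range.1 hk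
    have hp := perF_spec F n hm hinj k hkn
    have h1 : PySem.List.pyGetD nxt (k : ℤ) 0 = ((F^[1] k : ℕ) : ℤ) := by
      rw [hnxt k hkn]
      simp
    have := clenLoop_eq nxt F n hm hinj hnxt k hkn (n + 1) 1 (le_refl 1) hp.1 (by omega)
    simp only [Nat.cast_one] at this
    rw [h1, this]
  refine hcong.trans ?_
  rw [PySem.Dict.counter_eq_foldl]
  unfold lensList
  rw [List.foldl_map]

-- B's output list before sorting, as a flatMap over the distinct cycle lengths
lemma alt_ans_eq (F : ℕ → ℕ) (n : ℕ) :
    (PySem.Dict.counter (lensList F n)).items.foldl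
        (fun acc p => acc ++ List.replicate (PySem.Int.floordiv p.2 p.1).toNat p.1) []
      = (PySem.Set.ofList (lensList F n)).flatMap
          (fun L => List.replicate (PySem.Int.floordiv ((lensList F n).count L : ℤ) L).toNat L) := by
  rw [PySem.List.foldl_append_eq_flatMap
      (g := fun p : Int × Int => List.replicate (PySem.Int.floordiv p.2 p.1).toNat p.1)]
  rw [PySem.Dict.items_counter, List.flatMap_map]
  rfl

-- summing an ite over a list with no duplicates
lemma sum_map_ite_nodup (l : List Int) (hnd : l.Nodup) (v : Int) (f : Int → ℕ) :
    (l.map (fun a => if v = a then f a else 0)).sum = if v ∈ l then f v else 0 := by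
  induction l with
  | nil => simp
  | cons a l ih =>
    simp only [List.map_cons, List.sum_cons, List.mem_cons]
    have hnd' := (List.nodup_cons.1 hnd).2
    have hna := (List.nodup_cons.1 hnd).1
    by_cases hva : v = a
    · subst hva
      rw [if_pos rfl, if_pos (Or.inl rfl)]
      have : (l.map (fun b => if v = b then f b else 0)).sum = 0 := by
        rw [ih hnd']
        rw [if_neg hna]
      omega
    · rw [if_neg hva, ih hnd']
      by_cases hvl : v ∈ l
      · rw [if_pos hvl, if_pos (Or.inr hvl)]
        omega
      · rw [if_neg hvl, if_neg (by rintro (h | h); exact hva h; exact hvl h)]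

-- the multiset of B's list equals the multiset of the leaders' periods
lemma alt_perm_lead (F : ℕ → ℕ) (n : ℕ) (hm : ∀ s < n, F s < n)
    (hinj : ∀ s < n, ∀ t < n, F s = F t → s = t) :
    ((PySem.Set.ofList (lensList F n)).flatMap
        (fun L => List.replicate (PySem.Int.floordiv ((lensList F n).count L : ℤ) L).toNat L)).Perm
      (leadList F n n) := by
  apply List.perm_iff_count.mpr
  intro v
  -- count on the flatMap side
  rw [count_flatMap']
  have hrep : ∀ L : Int,
      ((fun L => List.replicate (PySem.Int.floordiv ((lensList F n).count L : ℤ) L).toNat L) L).count v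
        = if v = L then (PySem.Int.floordiv ((lensList F n).count L : ℤ) L).toNat else 0 := by
    intro L
    exact count_replicate' _ L v
  simp only [hrep]
  rw [sum_map_ite_nodup _ (PySem.Set.nodup_ofList _) v]
  -- count on the leaders side
  have hlead : (leadList F n n).count v
      = (List.range n).countP (fun s => (((perF F n s : ℕ) : ℤ) == v) && (omin F n s == s)) := by
    unfold leadList
    rw [List.count, List.countP_map, List.countP_filter]
    rfl
  by_cases hv : v ∈ lensList F n
  · rw [if_pos ((PySem.Set.mem_ofList _ _).2 hv)]
    obtain ⟨s0, hs0, hv0⟩ := List.mem_map.1 hv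
    have hs0n : s0 < n := List.mem_range.1 hs0
    have hV1 : 0 < perF F n s0 := (perF_spec F n hm hinj s0 hs0n).1
    -- write v as the cast of the natural number V
    set V : ℕ := perF F n s0 with hVdef
    have hvV : v = (V : ℤ) := hv0.symm
    subst hvV
    -- the count of V in lensList
    have hcnt : (lensList F n).count (V : ℤ) = (List.range n).countP (fun s => perF F n s = V) := by
      unfold lensList
      rw [List.count, List.countP_map]
      apply List.countP_congr
      intro s _
      constructor
      · intro h
        have : ((perF F n s : ℕ) : ℤ) = (V : ℤ) := by simpa using h
        simpa using Nat.cast_injective this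
      · intro h
        have : perF F n s = V := by simpa using h
        simp [this]
    -- the core identity, in countP form
    have hcore : (List.range n).countP (fun s => decide (perF F n s = V))
        = V * (List.range n).countP (fun s => decide (omin F n s = s ∧ perF F n s = V)) := by
      rw [← card_filter_countP n (fun s => decide (perF F n s = V)),
          ← card_filter_countP n (fun s => decide (omin F n s = s ∧ perF F n s = V))]
      have e1 : ((Finset.range n).filter (fun a => decide (perF F n a = V) = true))
          = ((Finset.range n).filter (fun s => perF F n s = V)) := by
        apply Finset.filter_congr
        intro x _
        simp
      have e2 : ((Finset.range n).filter (fun a => decide (omin F n a = a ∧ perF F n a = V) = true))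
          = ((Finset.range n).filter (fun m => omin F n m = m ∧ perF F n m = V)) := by
        apply Finset.filter_congr
        intro x _
        simp
      rw [e1, e2]
      exact count_per_eq F n hm hinj V
    have hK : (List.range n).countP (fun s => (((perF F n s : ℕ) : ℤ) == (V : ℤ)) && (omin F n s == s))
        = (List.range n).countP (fun s => decide (omin F n s = s ∧ perF F n s = V)) := by
      apply List.countP_congr
      intro s _
      constructor
      · intro h
        simp only [Bool.and_eq_true, beq_iff_eq, Nat.cast_inj] at h
        simp [h.1, h.2]
      · intro h
        simp only [decide_eq_true_eq] at h
        simp [h.1, h.2]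
    rw [hlead, hK]
    rw [hcnt, hcore, PySem.Int.floordiv_natCast, Nat.mul_div_cancel_left _ hV1]
    simp
  · rw [if_neg (fun h => hv ((PySem.Set.mem_ofList _ _).1 h))]
    rw [hlead]
    symm
    rw [List.countP_eq_zero]
    intro s hsr
    intro hcontra
    simp only [Bool.and_eq_true, beq_iff_eq] at hcontra
    exact hv (List.mem_map.2 ⟨s, hsr, hcontra.1⟩)



-- every integer in [0, 4*R*C) is an encoded in-range state
lemma decomp_state (R C : ℕ) (hC : 0 < C) (s : ℤ) (h0 : 0 ≤ s) (hlt : s < 4 * R * C) :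
    ∃ x y d : ℤ, InSt R C x y d ∧ s = enc C x y d := by
  have hCi : (0 : ℤ) < C := by exact_mod_cast hC
  refine ⟨(s / 4) / C, (s / 4) % C, s % 4, ?_, ?_⟩
  · have hq0 : 0 ≤ s / 4 := Int.ediv_nonneg h0 (by norm_num)
    have hqlt : s / 4 < (R : ℤ) * C := by
      rw [Int.ediv_lt_iff_lt_mul (by norm_num)]
      nlinarith
    refine ⟨Int.ediv_nonneg hq0 (le_of_lt hCi), ?_,
        Int.emod_nonneg _ (ne_of_gt hCi), Int.emod_lt_of_pos _ hCi,
        Int.emod_nonneg _ (by norm_num), Int.emod_lt_of_pos _ (by norm_num)⟩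
    rw [Int.ediv_lt_iff_lt_mul hCi]
    calc s / 4 < (R : ℤ) * C := hqlt
    _ = (C : ℤ) * R := by ring
    _ ≤ _ := by rw [Int.mul_comm]
  · unfold enc
    have h1 : (s / 4) / C * C + (s / 4) % C = s / 4 := by
      have h := Int.ediv_add_emod (s / 4) (C : ℤ)
      have hmc : (s / 4) / (C : ℤ) * C = (C : ℤ) * ((s / 4) / C) := Int.mul_comm _ _
      omega
    have h2 : (s / 4) * 4 + s % 4 = s := by
      have h := Int.ediv_add_emod s (4 : ℤ)
      omega
    rw [h1]
    omega

-- under Pre_, every cell read by the walk holds 'S', 'L' or 'R'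
lemma gridSLR (grid : List String) (hpre : Pre_solution grid) (i j : ℤ)
    (hi : 0 ≤ i) (hilt : i < (grid.length : ℤ))
    (hj : 0 ≤ j) (hjlt : j < ((grid.headD "").toList.length : ℤ)) :
    gridAt grid i j = 'S' ∨ gridAt grid i j = 'L' ∨ gridAt grid i j = 'R' := by
  obtain ⟨hne, hall⟩ := hpre
  have hrow : PySem.List.pyGet? grid i = some grid[i.toNat] :=
    PySem.List.pyGet?_eq_some_getElem _ hi hilt
  have hrowmem : grid[i.toNat] ∈ grid := List.getElem_mem _
  have hrowfact := List.all_eq_true.1 hall _ hrowmem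
  simp only [Bool.and_eq_true, decide_eq_true_eq, List.all_eq_true] at hrowfact
  obtain ⟨hlen, hchars⟩ := hrowfact
  have hjlt2 : j < ((grid[i.toNat] : String).toList.length : ℤ) := by
    have : ((grid.headD "").toList.length : ℤ) ≤ ((grid[i.toNat] : String).toList.length : ℤ) := by
      exact_mod_cast hlen
    omega
  have hcell : PySem.Str.pyGet? grid[i.toNat] j = some ((grid[i.toNat] : String).toList[j.toNat]'(by omega)) := by
    simp only [PySem.Str.pyGet?, PySem.Chars.pyGet?_eq_listPyGet?]
    exact PySem.List.pyGet?_eq_some_getElem _ hj hjlt2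
  have hmemtake : ((grid[i.toNat] : String).toList[j.toNat]'(by omega))
      ∈ (grid[i.toNat] : String).toList.take (grid.headD "").toList.length := by
    have hjC : j.toNat < (grid.headD "").toList.length := by omega
    have : ((grid[i.toNat] : String).toList.take (grid.headD "").toList.length)[j.toNat]'(by
        rw [List.length_take]; omega) = (grid[i.toNat] : String).toList[j.toNat]'(by omega) := by
      rw [List.getElem_take]
    rw [← this]
    exact List.getElem_mem _
  have hc := hchars _ hmemtake
  simp only [Bool.or_eq_true, beq_iff_eq] at hc
  unfold gridAt
  rw [hrow, Option.getD_some, hcell, Option.getD_some]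
  tauto

-- cancelling a common shift under mod
lemma mod_shift_inj (R a x x' : ℤ) (hR : 0 < R) (hx : 0 ≤ x) (hx2 : x < R)
    (hx' : 0 ≤ x') (hx2' : x' < R)
    (h : PySem.Int.mod (x + a) R = PySem.Int.mod (x' + a) R) : x = x' := by
  rw [PySem.Int.mod_eq_emod_of_pos hR, PySem.Int.mod_eq_emod_of_pos hR] at h
  have hm : Int.ModEq R (x + a) (x' + a) := h
  have hm2 : Int.ModEq R x x' := by
    have := hm.sub_right a
    simpa using this
  have : x % R = x' % R := hm2
  rw [Int.emod_eq_of_lt hx hx2, Int.emod_eq_of_lt hx' hx2'] at this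
  exact this

-- bSucc stays in range
lemma bSucc_bound (grid : List String) (R C : ℕ) (hR : 0 < R) (hC : 0 < C)
    (s : ℤ) (h0 : 0 ≤ s) (hlt : s < 4 * R * C) :
    0 ≤ bSucc grid R C s ∧ bSucc grid R C s < 4 * R * C := by
  obtain ⟨x, y, d, hin, rfl⟩ := decomp_state R C hC s h0 hlt
  rw [bSucc_enc hin]
  exact enc_range (step_in grid hR hC hin)

-- bSucc is injective on the state range (needs the SLR grid fact)
lemma bSucc_inj (grid : List String) (hpre : Pre_solution grid) (R C : ℕ)
    (hRdef : R = grid.length) (hCdef : C = (grid.headD "").toList.length)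
    (hR : 0 < R) (hC : 0 < C)
    (s t : ℤ) (hs0 : 0 ≤ s) (hs1 : s < 4 * R * C) (ht0 : 0 ≤ t) (ht1 : t < 4 * R * C)
    (heq : bSucc grid R C s = bSucc grid R C t) : s = t := by
  obtain ⟨x, y, d, hin, rfl⟩ := decomp_state R C hC s hs0 hs1
  obtain ⟨x', y', d', hin', rfl⟩ := decomp_state R C hC t ht0 ht1
  rw [bSucc_enc hin, bSucc_enc hin'] at heq
  have hstep := step_in grid hR hC hin
  have hstep' := step_in grid hR hC hin'
  obtain ⟨hkx, hky, hkd⟩ := enc_inj hstep hstep' heq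
  obtain ⟨hx1, hx2, hy1, hy2, hd1, hd2⟩ := hin
  obtain ⟨hx1', hx2', hy1', hy2', hd1', hd2'⟩ := hin'
  -- the landing cell is the same, so the same mirror is applied
  set kx := PySem.Int.mod (x + PySem.List.pyGetD dxPy d 0) R with hkxdef
  set ky := PySem.Int.mod (y + PySem.List.pyGetD dyPy d 0) C with hkydef
  have hkxb : 0 ≤ kx ∧ kx < R := ⟨hstep.1, hstep.2.1⟩
  have hkyb : 0 ≤ ky ∧ ky < C := ⟨hstep.2.2.1, hstep.2.2.2.1⟩
  have hchar := gridSLR grid hpre kx ky hkxb.1 (by rw [← hRdef]; exact hkxb.2)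
      hkyb.1 (by rw [← hCdef]; exact hkyb.2)
  -- direction equality
  have hd : d = d' := by
    rw [← hkx, ← hky] at hkd
    rcases hchar with hc | hc | hc <;> rw [hc] at hkd <;> simp at hkd
    · exact hkd
    · interval_cases d <;> interval_cases d' <;> revert hkd <;> decide
    · interval_cases d <;> interval_cases d' <;> revert hkd <;> decide
  subst hd
  -- position equality
  have hRi : (0 : ℤ) < R := by exact_mod_cast hR
  have hCi : (0 : ℤ) < C := by exact_mod_cast hC
  have hx : x = x' := mod_shift_inj R _ x x' hRi hx1 hx2 hx1' hx2' (hkxdef.symm.trans hkx)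
  have hy : y = y' := mod_shift_inj C _ y y' hCi hy1 hy2 hy1' hy2' (hkydef.symm.trans hky)
  rw [hx, hy]


theorem refB_eq_alt (grid : List String) (hpre : Pre_solution grid) :
    refB grid = solution_alt grid := by
  rcases grid with _ | ⟨h0, t⟩
  · exact absurd rfl hpre.1
  · have hn : (4 : Int) * ((h0 :: t : List String).length : Int) * (h0.toList.length : Int)
        = ((4 * (h0 :: t : List String).length * h0.toList.length : Nat) : Int) := by push_cast; ring
    simp only [refB, solution_alt, PySem.List.len_eq, PySem.List.pyGet?_zero_cons,
      Option.getD_some, PySem.Str.len_eq, Int.toNat_natCast, hn]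
    have hRdef : (h0 :: t : List String).length = (h0 :: t : List String).length := rfl
    have hCdef : ((h0 :: t : List String).headD "").toList.length = h0.toList.length := rfl
    generalize hRn : (h0 :: t : List String).length = Rn at *
    generalize hCn : h0.toList.length = Cn at *
    have hR : 0 < Rn := by rw [← hRn]; exact Nat.succ_pos t.length
    rcases Nat.eq_zero_or_pos Cn with hC0 | hC
    · subst hC0
      simp [PySem.List.pyRange_one_eq_nil (le_refl (0 : Int)), PySem.Dict.empty]
    · set nN : ℕ := 4 * Rn * Cn with hnN
      have hnpos : 0 < nN := by positivity
      have hnint : (0 : ℤ) < (nN : ℤ) := by exact_mod_cast hnpos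
      -- the shared successor table
      rw [PySem.List.foldl_append_singleton_eq_map]
      set nxt : List Int := (PySem.List.pyRange 0 ((nN : ℕ) : ℤ)).map
          (bSucc (h0 :: t) ((Rn : ℕ) : ℤ) ((Cn : ℕ) : ℤ)) with hnxtdef
      simp only [List.nil_append]
      -- the flattened successor function on ℕ
      set F : ℕ → ℕ := fun s => (bSucc (h0 :: t) ((Rn : ℕ) : ℤ) ((Cn : ℕ) : ℤ) (s : ℤ)).toNat with hFdef
      have hbnd : ∀ s : ℕ, s < nN →
          0 ≤ bSucc (h0 :: t) ((Rn : ℕ) : ℤ) ((Cn : ℕ) : ℤ) (s : ℤ)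
          ∧ bSucc (h0 :: t) ((Rn : ℕ) : ℤ) ((Cn : ℕ) : ℤ) (s : ℤ) < 4 * Rn * Cn := by
        intro s hs
        exact bSucc_bound (h0 :: t) Rn Cn hR hC (s : ℤ) (by positivity)
          (by push_cast; exact_mod_cast (by exact_mod_cast hs : (s : ℤ) < (nN : ℤ)))
      have hmF : ∀ s < nN, F s < nN := by
        intro s hs
        have := hbnd s hs
        rw [hFdef]
        simp only
        omega
      have hcastF : ∀ s : ℕ, s < nN →
          ((F s : ℕ) : ℤ) = bSucc (h0 :: t) ((Rn : ℕ) : ℤ) ((Cn : ℕ) : ℤ) (s : ℤ) := by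
        intro s hs
        rw [hFdef]
        simp only
        exact Int.toNat_of_nonneg (hbnd s hs).1
      have hinjF : ∀ s < nN, ∀ u < nN, F s = F u → s = u := by
        intro s hs u hu hFeq
        have h1 : bSucc (h0 :: t) ((Rn : ℕ) : ℤ) ((Cn : ℕ) : ℤ) (s : ℤ)
            = bSucc (h0 :: t) ((Rn : ℕ) : ℤ) ((Cn : ℕ) : ℤ) (u : ℤ) := by
          rw [← hcastF s hs, ← hcastF u hu]
          exact_mod_cast hFeq
        have := bSucc_inj (h0 :: t) hpre Rn Cn hRn.symm hCdef.symm hR hC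
          (s : ℤ) (u : ℤ) (by positivity)
          (by exact_mod_cast (by exact_mod_cast hs : (s : ℤ) < (nN : ℤ)))
          (by positivity)
          (by exact_mod_cast (by exact_mod_cast hu : (u : ℤ) < (nN : ℤ))) h1
        exact_mod_cast this
      have hnxtF : ∀ s : ℕ, s < nN → PySem.List.pyGetD nxt (s : ℤ) 0 = ((F s : ℕ) : ℤ) := by
        intro s hs
        rw [hnxtdef, PySem.List.pyGetD_map_pyRange_of_nonneg _ _ _ _ (by positivity)
          (by exact_mod_cast hs), hcastF s hs]
      -- refB side: the leaders' periods
      have href := refFold_eq nxt F nN hmF hinjF hnxtF nN (le_refl nN)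
      -- alt side: the counting dictionary
      have hcounts := alt_counts_eq nxt F nN hmF hinjF hnxtF
      have hans := alt_ans_eq F nN
      have hperm := alt_perm_lead F nN hmF hinjF
      rw [PySem.List.pyRange_zero_natCast nN]
      simp only [List.foldl_map]
      rw [show (fun (st : List Int × List Bool) (k : ℕ) =>
            if PySem.List.pyGetD st.2 (k : ℤ) false = true then st
            else
              (st.1 ++ [(refWalk nxt (k : ℤ) (nN + 1) (PySem.List.pyGetD nxt (k : ℤ) 0) 1
                  (PySem.List.pySetD (PySem.List.pySetD st.2 (k : ℤ) true)
                    (PySem.List.pyGetD nxt (k : ℤ) 0) true)).1],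
               (refWalk nxt (k : ℤ) (nN + 1) (PySem.List.pyGetD nxt (k : ℤ) 0) 1
                  (PySem.List.pySetD (PySem.List.pySetD st.2 (k : ℤ) true)
                    (PySem.List.pyGetD nxt (k : ℤ) 0) true)).2))
          = (fun (st : List Int × List Bool) (k : ℕ) => refBody nxt (nN + 1) st (k : ℤ)) from rfl]
      rw [href.1, hcounts, hans, PySem.List.sorted_id_eq_sorted_id_iff_perm]
      exact hperm.symm


-- ===== VERDICT (by name: the statement is the Claim_ definition above) =====
theorem solution_spec : Claim_equal_solution := by
  intro grid _ hpre
  unfold Spec_solution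
  rw [solution_eq_refB, refB_eq_alt grid hpre]
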